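-- pv_equiv track=rewrite | github.com/panteha/graph-based-prediction | playlist.py | make_graph_dict
-- ===== SOURCE A (Python) =====
-- def get_tracks(playlist):
--     return list(sorted(track['track_uri']
--                        for track in playlist['tracks']))
--
-- def make_graph_dict(playlist_list):
--     """
--     returns
--     g graph
--     tracks_dict keys are track_uri, values are track_ids
--     tracks_id_dict keys are track_ids, values are track_uris
--     """
--     g = {}
--     next_track_id = len(playlist_list)
--     tracks_dict = {}
--     for increasing_playlist_id in range(len(playlist_list)):
--         assert increasing_playlist_id not in g
--         g[increasing_playlist_id] = set([])
--
--         track_list = get_tracks(playlist_list[increasing_playlist_id])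
--
--         for track_index, track_uri in enumerate(track_list):
--             if track_uri in tracks_dict:
--                 increasing_track_id = tracks_dict[track_uri]
--             else:
--                 increasing_track_id = next_track_id
--                 tracks_dict[track_uri] = next_track_id
--                 next_track_id += 1
--                 assert increasing_track_id not in g
--                 g[increasing_track_id] = set([])
--             g[increasing_track_id].add(increasing_playlist_id)
--             g[increasing_playlist_id].add(increasing_track_id)
--     tracks_id_dict = dict(zip(tracks_dict.values(), tracks_dict.keys()))
--     return g, tracks_dict, tracks_id_dict
-- ===== SOURCE B (Python) =====
-- def make_graph_dict(playlist_list):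
--     """
--     returns
--     g graph
--     tracks_dict keys are track_uri, values are track_ids
--     tracks_id_dict keys are track_ids, values are track_uris
--     """
--     n = len(playlist_list)
--     lists = [sorted(track['track_uri'] for track in playlist['tracks'])
--              for playlist in playlist_list]
--     # inverted index: track_uri -> increasing list of distinct playlist ids
--     # containing it; key order = first-seen order of the uris
--     members = {}
--     for pid, tl in enumerate(lists):
--         for u in tl:
--             m = members.setdefault(u, [])
--             if not m or m[-1] != pid:
--                 m.append(pid)
--     # track ids follow the first-seen order, starting right after playlist ids
--     tracks_dict = {u: n + i for i, u in enumerate(members)}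
--     # emit each node's complete adjacency at once
--     g = {}
--     for pid, tl in enumerate(lists):
--         g[pid] = {tracks_dict[u] for u in tl}
--         for u in tl:
--             tid = tracks_dict[u]
--             if tid not in g:
--                 g[tid] = set(members[u])
--     tracks_id_dict = {n + i: u for i, u in enumerate(members)}
--     return g, tracks_dict, tracks_id_dict
-- ===== Notes on version B (the rewrite author's own statement) =====
-- stated objective: alternative
-- what changed: A builds the graph edge-by-edge in one interleaved loop, growing adjacency sets incrementally and assigning track ids from a running counter; B instead builds an inverted index (track_uri -> list of playlist ids) plus first-seen id assignment by enumeration, and then writes each node's complete adjacency exactly once (a playlist node as a set comprehension over its tracks, a track node directly from its membership list).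
import Mathlib
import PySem

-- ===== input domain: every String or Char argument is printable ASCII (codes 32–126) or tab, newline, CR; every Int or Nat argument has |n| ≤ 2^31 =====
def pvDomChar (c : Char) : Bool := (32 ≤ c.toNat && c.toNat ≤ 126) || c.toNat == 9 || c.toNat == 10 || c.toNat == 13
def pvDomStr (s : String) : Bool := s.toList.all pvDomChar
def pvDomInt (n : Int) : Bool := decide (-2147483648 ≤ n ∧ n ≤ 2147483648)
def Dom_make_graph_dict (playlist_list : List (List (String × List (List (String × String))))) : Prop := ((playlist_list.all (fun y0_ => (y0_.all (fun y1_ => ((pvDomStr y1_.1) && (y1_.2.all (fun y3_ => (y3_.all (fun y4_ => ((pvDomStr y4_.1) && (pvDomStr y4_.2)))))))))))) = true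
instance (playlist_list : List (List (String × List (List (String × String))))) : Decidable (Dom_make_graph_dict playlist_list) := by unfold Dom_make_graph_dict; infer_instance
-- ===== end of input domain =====

-- One honest line: B replaces A's edge-by-edge graph growth (adjacency sets mutated per edge,
-- track ids from a running counter) by an inverted index: per-track membership lists and
-- enumeration-based first-seen id assignment, each node's complete adjacency written once —
-- an alternative algorithm of the same cost, not claimed faster.

-- ===== PORT A =====
-- shared transcription of the expression sorted(track['track_uri'] for track in playlist['tracks']),
-- which appears verbatim in both Python programs (A's get_tracks, B's comprehension)
def pvGetTracks (playlist : List (String × List (List (String × String)))) : List String :=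
  PySem.List.sorted
    (((PySem.Dict.mk playlist).getD "tracks" []).map
      (fun track => (PySem.Dict.mk track).getD "track_uri" ""))
    (fun s => s) false

-- body of A's inner loop; state = (g, next_track_id, tracks_dict)
def pvAStep (pid : Int)
    (st : PySem.Dict Int (List Int) × Int × PySem.Dict String Int) (uri : String) :
    PySem.Dict Int (List Int) × Int × PySem.Dict String Int :=
  match (st.2.2).get? uri with
  | some tid =>
      (((st.1.modify tid [] (fun s => PySem.Set.add s pid)).modify pid []
          (fun s => PySem.Set.add s tid)), st.2.1, st.2.2)
  | none =>
      ((((st.1.insert st.2.1 []).modify st.2.1 [] (fun s => PySem.Set.add s pid)).modify pid []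
          (fun s => PySem.Set.add s st.2.1)), st.2.1 + 1, (st.2.2).insert uri st.2.1)

def make_graph_dict (playlist_list : List (List (String × List (List (String × String))))) : (List (Int × List Int)) × (List (String × Int)) × (List (Int × String)) :=
  let st :=
    (PySem.List.pyRange 0 (playlist_list.length : Int) 1).foldl
      (fun st pid =>
        let g := st.1.insert pid ([] : List Int)
        let track_list := pvGetTracks (PySem.List.pyGetD playlist_list pid [])
        (PySem.List.enumerate track_list 0).foldl (fun st2 p => pvAStep pid st2 p.2)
          (g, st.2.1, st.2.2))
      (PySem.Dict.empty, (playlist_list.length : Int), PySem.Dict.empty)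
  (st.1.items, st.2.2.items,
    (PySem.Dict.ofList ((st.2.2.values).zip st.2.2.keys)).items)

-- ===== PORT B =====
-- pass-1 body: record playlist p.1 in u's membership list unless it is already its last entry
def pvMstep (pid : Int) (M : PySem.Dict String (List Int)) (u : String) :
    PySem.Dict String (List Int) :=
  let m := M.getD u []
  let M := M.setdefault u []
  if m.getLast? = some pid then M else M.modify u [] (fun l => l ++ [pid])

-- pass-2 body: the first time a track id appears, write its complete adjacency from members
def pvNStep (td : PySem.Dict String Int) (mem : PySem.Dict String (List Int))
    (g : PySem.Dict Int (List Int)) (u : String) : PySem.Dict Int (List Int) :=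
  let tid := td.getD u 0
  if g.contains tid then g else g.insert tid (PySem.Set.ofList (mem.getD u []))

def make_graph_dict_alt (playlist_list : List (List (String × List (List (String × String))))) : (List (Int × List Int)) × (List (String × Int)) × (List (Int × String)) :=
  let n : Int := playlist_list.length
  let lists := playlist_list.map pvGetTracks
  let members : PySem.Dict String (List Int) :=
    (PySem.List.enumerate lists 0).foldl
      (fun M p => p.2.foldl (pvMstep p.1) M) PySem.Dict.empty
  let tracks_dict : PySem.Dict String Int :=
    PySem.Dict.ofList ((PySem.List.enumerate members.keys 0).map (fun q => (q.2, n + q.1)))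
  let g : PySem.Dict Int (List Int) :=
    (PySem.List.enumerate lists 0).foldl
      (fun g p =>
        p.2.foldl (pvNStep tracks_dict members)
          (g.insert p.1 (PySem.Set.ofList (p.2.map (fun u => tracks_dict.getD u 0)))))
      PySem.Dict.empty
  let tracks_id_dict : PySem.Dict Int String :=
    PySem.Dict.ofList ((PySem.List.enumerate members.keys 0).map (fun q => (n + q.1, q.2)))
  (g.items, tracks_dict.items, tracks_id_dict.items)

-- ===== PRECONDITION & SPEC =====
-- Pre_ excludes inputs on which A raises KeyError: a playlist dict without key 'tracks',
-- or a track dict without key 'track_uri' (B raises there too).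
def Pre_make_graph_dict (playlist_list : List (List (String × List (List (String × String))))) : Prop :=
  ∀ p ∈ playlist_list, "tracks" ∈ p.map Prod.fst ∧
    ∀ t ∈ (PySem.Dict.mk p).getD "tracks" [], "track_uri" ∈ t.map Prod.fst
instance (playlist_list : List (List (String × List (List (String × String))))) : Decidable (Pre_make_graph_dict playlist_list) := by unfold Pre_make_graph_dict; infer_instance

def pvWitness_make_graph_dict : (List (List (String × List (List (String × String))))) :=
  [[("tracks", [[("track_uri", "b")], [("track_uri", "a")]])],
   [("tracks", [[("track_uri", "a")]])]]

def Spec_make_graph_dict (playlist_list : List (List (String × List (List (String × String))))) (out : (List (Int × List Int)) × (List (String × Int)) × (List (Int × String))) : Prop := out = make_graph_dict_alt playlist_list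
instance (playlist_list : List (List (String × List (List (String × String))))) (out : (List (Int × List Int)) × (List (String × Int)) × (List (Int × String))) : Decidable (Spec_make_graph_dict playlist_list out) := by unfold Spec_make_graph_dict; infer_instance

-- ===== CLAIM (what is proved, stated in full; the proofs are below) =====
def Claim_equal_make_graph_dict : Prop := ∀ (playlist_list : List (List (String × List (List (String × String))))), Dom_make_graph_dict playlist_list → Pre_make_graph_dict playlist_list → Spec_make_graph_dict playlist_list (make_graph_dict playlist_list)

-- ===== LEMMAS AND PROOFS =====

-- proof-side characterisations of A's loops and of a reference two-pass construction
-- (pvAsg… = id assignment in first-seen order, pvBOuter = edge-by-edge graph build with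
-- the finished dict) used as a stepping stone between the two ports

def pvBAssign (n : Int) (td : PySem.Dict String Int) (uri : String) : PySem.Dict String Int :=
  if td.contains uri then td else td.insert uri (n + (td.size : Int))

def pvBStep (td : PySem.Dict String Int) (pid : Int)
    (g : PySem.Dict Int (List Int)) (uri : String) : PySem.Dict Int (List Int) :=
  let tid := td.getD uri 0
  let g := if g.contains tid then g else g.insert tid ([] : List Int)
  (g.modify tid [] (fun s => PySem.Set.add s pid)).modify pid [] (fun s => PySem.Set.add s tid)

def pvAInner (pid : Int) (st : PySem.Dict Int (List Int) × Int × PySem.Dict String Int)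
    (tl : List String) : PySem.Dict Int (List Int) × Int × PySem.Dict String Int :=
  tl.foldl (pvAStep pid) st

def pvAOuter : (PySem.Dict Int (List Int) × Int × PySem.Dict String Int) → Int →
    List (List String) → (PySem.Dict Int (List Int) × Int × PySem.Dict String Int)
  | st, _, [] => st
  | st, k, tl :: rest => pvAOuter (pvAInner k (st.1.insert k [], st.2.1, st.2.2) tl) (k + 1) rest

def pvBInner (D : PySem.Dict String Int) (pid : Int) (g : PySem.Dict Int (List Int))
    (tl : List String) : PySem.Dict Int (List Int) :=
  tl.foldl (pvBStep D pid) g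

def pvBOuter : PySem.Dict String Int → PySem.Dict Int (List Int) → Int →
    List (List String) → PySem.Dict Int (List Int)
  | _, g, _, [] => g
  | D, g, k, tl :: rest => pvBOuter D (pvBInner D k (g.insert k []) tl) (k + 1) rest

def pvAsg (n : Int) (td : PySem.Dict String Int) (tl : List String) : PySem.Dict String Int :=
  tl.foldl (pvBAssign n) td

def pvAsgAll (n : Int) (td : PySem.Dict String Int) (rest : List (List String)) :
    PySem.Dict String Int :=
  rest.foldl (pvAsg n) td

-- recursion forms of port B's two loops
def pvMOuter : PySem.Dict String (List Int) → Int → List (List String) →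
    PySem.Dict String (List Int)
  | M, _, [] => M
  | M, k, tl :: rest => pvMOuter (tl.foldl (pvMstep k) M) (k + 1) rest

def pvNOuter (td : PySem.Dict String Int) (mem : PySem.Dict String (List Int)) :
    PySem.Dict Int (List Int) → Int → List (List String) → PySem.Dict Int (List Int)
  | g, _, [] => g
  | g, k, tl :: rest =>
      pvNOuter td mem
        (tl.foldl (pvNStep td mem)
          (g.insert k (PySem.Set.ofList (tl.map (fun u => td.getD u 0))))) (k + 1) rest

-- membership closed form: the increasing list of playlist ids (from k on) whose list contains u
def pvMems : Int → List (List String) → String → List Int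
  | _, [], _ => []
  | k, tl :: rest, u => (if u ∈ tl then [k] else []) ++ pvMems (k + 1) rest u

-- an enumerate-fold whose body ignores the index is a plain fold
theorem pv_foldl_enumerate_snd {a b : Type} (F : b -> a -> b) (tl : List a) :
    forall (s : Int) (st : b),
    (PySem.List.enumerate tl s).foldl (fun st q => F st q.2) st = tl.foldl F st := by
  induction tl with
  | nil => intro s st; rfl
  | cons x xs ih =>
      intro s st
      simp only [PySem.List.enumerate_cons, List.foldl_cons, ih]

theorem pv_aouter_bridge2 (pl : List (List (String × List (List (String × String))))) :
    forall (k : Int) (st : PySem.Dict Int (List Int) × Int × PySem.Dict String Int),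
    (PySem.List.enumerate pl k).foldl
      (fun st p => List.foldl (pvAStep p.1) (st.1.insert p.1 [], st.2.1, st.2.2)
        (pvGetTracks p.2)) st
    = pvAOuter st k (pl.map pvGetTracks) := by
  induction pl with
  | nil => intro k st; rfl
  | cons p ps ih =>
      intro k st
      simp only [PySem.List.enumerate_cons, List.foldl_cons, List.map_cons, pvAOuter]
      exact ih (k + 1) _

theorem pv_aouter_bridge (pl : List (List (String × List (List (String × String))))) :
    forall (k : Int) (st : PySem.Dict Int (List Int) × Int × PySem.Dict String Int),
    (PySem.List.enumerate pl k).foldl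
      (fun st p =>
        (PySem.List.enumerate (pvGetTracks p.2) 0).foldl (fun st2 q => pvAStep p.1 st2 q.2)
          (st.1.insert p.1 [], st.2.1, st.2.2)) st
    = pvAOuter st k (pl.map pvGetTracks) := by
  intro k st
  simp only [pv_foldl_enumerate_snd]
  exact pv_aouter_bridge2 pl k st

-- a value returned by get? is one of the dict's values
theorem pv_get?_mem_values {k v : Type} [BEq k] (d : PySem.Dict k v) (x : k) (w : v)
    (h : d.get? x = some w) : w ∈ d.values := by
  simp only [PySem.Dict.get?, Option.map_eq_some_iff] at h
  obtain ⟨p, hp, hpw⟩ := h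
  have := List.mem_of_find?_eq_some hp
  simp only [PySem.Dict.values, List.mem_map]
  exact ⟨p, this, hpw⟩

-- inserting a fresh key appends its value
theorem pv_insert_values_eq {k v : Type} [BEq k] (d : PySem.Dict k v) (x : k) (w : v)
    (hc : d.contains x = false) : (d.insert x w).values = d.values ++ [w] := by
  show (d.insert x w).items.map (fun p => p.2) = _
  rw [PySem.Dict.items_insert_of_not_contains d w hc, List.map_append]
  rfl

-- the fresh-insert step keeps tracks_dict's values equal to the id range n, …, n+size-1
theorem pv_insert_vals (n : Int) (td : PySem.Dict String Int) (uri : String)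
    (hvals : td.values = PySem.List.pyRange n (n + (td.size : Int)) 1)
    (hcont : td.contains uri = false) :
    (td.insert uri (n + (td.size : Int))).values
      = PySem.List.pyRange n
          (n + (((td.insert uri (n + (td.size : Int))).size : Nat) : Int)) 1 := by
  have hsz : (td.insert uri (n + (td.size : Int))).size = td.size + 1 := by
    rw [PySem.Dict.size_insert, hcont]; simp
  rw [pv_insert_values_eq td uri _ hcont, hvals, hsz]
  have h2 : n + ((td.size + 1 : Nat) : Int) = (n + (td.size : Int)) + 1 := by push_cast; ring
  rw [h2, PySem.List.pyRange_one_succ_right (by omega : n ≤ n + (td.size : Int))]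

-- pass-1 assignment never disturbs an existing binding
theorem pv_asg_preserve (n : Int) (tl : List String) :
    forall (td : PySem.Dict String Int) (u : String) (v : Int),
    td.get? u = some v → (pvAsg n td tl).get? u = some v := by
  induction tl with
  | nil => intro td u v h; exact h
  | cons uri tl ih =>
      intro td u v h
      show (pvAsg n (pvBAssign n td uri) tl).get? u = some v
      apply ih
      unfold pvBAssign
      split
      · exact h
      · next hc =>
          rcases eq_or_ne u uri with rfl | hne
          · rw [PySem.Dict.contains_eq_isSome_get?, h] at hc; simp at hc
          · rw [PySem.Dict.get?_insert_of_ne _ _ hne]; exact h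

theorem pv_asgAll_preserve (n : Int) (rest : List (List String)) :
    forall (td : PySem.Dict String Int) (u : String) (v : Int),
    td.get? u = some v → (pvAsgAll n td rest).get? u = some v := by
  induction rest with
  | nil => intro td u v h; exact h
  | cons tl rest ih =>
      intro td u v h
      exact ih _ _ _ (pv_asg_preserve n tl td u v h)

-- pass 1 keeps the values-are-a-range invariant
theorem pv_asg_vals (n : Int) (tl : List String) :
    forall (td : PySem.Dict String Int),
    td.values = PySem.List.pyRange n (n + (td.size : Int)) 1 →
    (pvAsg n td tl).values
      = PySem.List.pyRange n (n + ((pvAsg n td tl).size : Int)) 1 := by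
  induction tl with
  | nil => intro td h; exact h
  | cons uri tl ih =>
      intro td h
      show (pvAsg n (pvBAssign n td uri) tl).values = _
      apply ih
      unfold pvBAssign
      split
      · exact h
      · next hc => exact pv_insert_vals n td uri h (by simpa using hc)

theorem pv_asgAll_vals (n : Int) (rest : List (List String)) :
    forall (td : PySem.Dict String Int),
    td.values = PySem.List.pyRange n (n + (td.size : Int)) 1 →
    (pvAsgAll n td rest).values
      = PySem.List.pyRange n (n + ((pvAsgAll n td rest).size : Int)) 1 := by
  induction rest with
  | nil => intro td h; exact h
  | cons tl rest ih =>
      intro td h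
      exact ih _ (pv_asg_vals n tl td h)

-- the inner (per-playlist) loops of A and the reference build agree and preserve the invariants
theorem pv_inner_main (D : PySem.Dict String Int) (n : Int) (tl : List String) :
    forall (g : PySem.Dict Int (List Int)) (td : PySem.Dict String Int) (k : Int),
    0 ≤ k → k < n →
    td.values = PySem.List.pyRange n (n + (td.size : Int)) 1 →
    (∀ i ∈ g.keys, (0 ≤ i ∧ i ≤ k) ∨ i ∈ td.values) →
    (∀ v ∈ td.values, v ∈ g.keys) →
    (∀ u v, (pvAsg n td tl).get? u = some v → D.get? u = some v) →
    pvAInner k (g, n + (td.size : Int), td) tl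
        = (pvBInner D k g tl, n + ((pvAsg n td tl).size : Int), pvAsg n td tl)
    ∧ (∀ i ∈ (pvBInner D k g tl).keys, (0 ≤ i ∧ i ≤ k) ∨ i ∈ (pvAsg n td tl).values)
    ∧ (∀ v ∈ (pvAsg n td tl).values, v ∈ (pvBInner D k g tl).keys) := by
  induction tl with
  | nil =>
      intro g td k hk0 hkn hvals hgk hvk hD
      exact ⟨rfl, hgk, hvk⟩
  | cons uri tl ih =>
      intro g td k hk0 hkn hvals hgk hvk hD
      have hasg : pvAsg n td (uri :: tl) = pvAsg n (pvBAssign n td uri) tl := rfl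
      cases hget : td.get? uri with
      | some tid =>
          -- seen uri: both sides modify the two existing adjacency sets
          have hcont : td.contains uri = true := by
            rw [PySem.Dict.contains_eq_isSome_get?, hget]; rfl
          have hba : pvBAssign n td uri = td := by unfold pvBAssign; rw [hcont]; simp
          have hDuri : D.get? uri = some tid :=
            hD uri tid (by rw [hasg, hba]; exact pv_asg_preserve n tl td uri tid hget)
          have htidv : tid ∈ td.values := pv_get?_mem_values td uri tid hget
          have htidg : g.contains tid = true :=
            (PySem.Dict.contains_iff_mem_keys g tid).mpr (hvk tid htidv)
          have hstepA : pvAStep k (g, n + (td.size : Int), td) uri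
              = ((g.modify tid [] (fun s => PySem.Set.add s k)).modify k []
                  (fun s => PySem.Set.add s tid), n + (td.size : Int), td) := by
            unfold pvAStep; rw [hget]
          have hstepB : pvBStep D k g uri
              = (g.modify tid [] (fun s => PySem.Set.add s k)).modify k []
                  (fun s => PySem.Set.add s tid) := by
            unfold pvBStep
            rw [PySem.Dict.getD_eq_get?_getD, hDuri]
            simp [htidg]
          set g2 := (g.modify tid [] (fun s => PySem.Set.add s k)).modify k []
              (fun s => PySem.Set.add s tid) with hg2
          have hmemg2 : ∀ i, i ∈ g2.keys ↔ (i = k ∨ i = tid ∨ i ∈ g.keys) := by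
            intro i
            rw [hg2]
            unfold PySem.Dict.modify
            rw [PySem.Dict.mem_keys_insert, PySem.Dict.mem_keys_insert]
          have hgk2 : ∀ i ∈ g2.keys, (0 ≤ i ∧ i ≤ k) ∨ i ∈ td.values := by
            intro i hi
            rcases (hmemg2 i).mp hi with rfl | rfl | hi
            · exact Or.inl ⟨hk0, le_refl _⟩
            · exact Or.inr htidv
            · exact hgk i hi
          have hvk2 : ∀ v ∈ td.values, v ∈ g2.keys := by
            intro v hv
            exact (hmemg2 v).mpr (Or.inr (Or.inr (hvk v hv)))
          have hD2 : ∀ u v, (pvAsg n td tl).get? u = some v → D.get? u = some v := by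
            intro u v h; exact hD u v (by rw [hasg, hba]; exact h)
          obtain ⟨e1, e3, e4⟩ := ih g2 td k hk0 hkn hvals hgk2 hvk2 hD2
          refine ⟨?_, ?_, ?_⟩
          · show pvAInner k (pvAStep k (g, n + (td.size : Int), td) uri) tl = _
            rw [hstepA, e1, hasg, hba]
            show (pvBInner D k g2 tl, _, _) = (pvBInner D k (pvBStep D k g uri) tl, _, _)
            rw [hstepB]
          · show ∀ i ∈ (pvBInner D k (pvBStep D k g uri) tl).keys, _
            rw [hstepB, hasg, hba]; exact e3
          · show ∀ v ∈ (pvAsg n td (uri :: tl)).values,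
              v ∈ (pvBInner D k (pvBStep D k g uri) tl).keys
            rw [hstepB, hasg, hba]; exact e4
      | none =>
          -- fresh uri: both sides create the new track node with id n + td.size
          have hcont : td.contains uri = false := by
            rw [PySem.Dict.contains_eq_isSome_get?, hget]; rfl
          have hba : pvBAssign n td uri = td.insert uri (n + (td.size : Int)) := by
            unfold pvBAssign; rw [hcont]; simp
          have hget2 : (td.insert uri (n + (td.size : Int))).get? uri
              = some (n + (td.size : Int)) := PySem.Dict.get?_insert_self td uri _
          have hasg2 : pvAsg n td (uri :: tl)
              = pvAsg n (td.insert uri (n + (td.size : Int))) tl := by rw [hasg, hba]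
          have hDuri : D.get? uri = some (n + (td.size : Int)) :=
            hD uri _ (by rw [hasg2]; exact pv_asg_preserve n tl _ uri _ hget2)
          have hsize2 : (td.insert uri (n + (td.size : Int))).size = td.size + 1 := by
            rw [PySem.Dict.size_insert, hcont]; simp
          have hvals2 : (td.insert uri (n + (td.size : Int))).values
              = PySem.List.pyRange n
                  (n + ((td.insert uri (n + (td.size : Int))).size : Int)) 1 :=
            pv_insert_vals n td uri hvals hcont
          have hnextg : g.contains (n + (td.size : Int)) = false := by
            rcases h : g.contains (n + (td.size : Int)) with _ | _
            · rfl
            · exfalso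
              have hmem := (PySem.Dict.contains_iff_mem_keys g _).mp h
              rcases hgk _ hmem with ⟨_, hle⟩ | hv
              · omega
              · rw [hvals] at hv
                have := (PySem.List.mem_pyRange_one).mp hv
                omega
          have hstepA : pvAStep k (g, n + (td.size : Int), td) uri
              = (((g.insert (n + (td.size : Int)) []).modify (n + (td.size : Int)) []
                    (fun s => PySem.Set.add s k)).modify k []
                  (fun s => PySem.Set.add s (n + (td.size : Int))),
                 (n + (td.size : Int)) + 1, td.insert uri (n + (td.size : Int))) := by
            unfold pvAStep; rw [hget]
          have hstepB : pvBStep D k g uri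
              = ((g.insert (n + (td.size : Int)) []).modify (n + (td.size : Int)) []
                    (fun s => PySem.Set.add s k)).modify k []
                  (fun s => PySem.Set.add s (n + (td.size : Int))) := by
            unfold pvBStep
            rw [PySem.Dict.getD_eq_get?_getD, hDuri]
            simp [hnextg]
          set g2 := ((g.insert (n + (td.size : Int)) []).modify (n + (td.size : Int)) []
                (fun s => PySem.Set.add s k)).modify k []
              (fun s => PySem.Set.add s (n + (td.size : Int))) with hg2
          have hmemg2 : ∀ i, i ∈ g2.keys ↔ (i = k ∨ i = n + (td.size : Int) ∨ i ∈ g.keys) := by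
            intro i
            rw [hg2]
            unfold PySem.Dict.modify
            rw [PySem.Dict.mem_keys_insert, PySem.Dict.mem_keys_insert,
              PySem.Dict.mem_keys_insert]
            tauto
          have hvapp : (td.insert uri (n + (td.size : Int))).values
              = td.values ++ [n + (td.size : Int)] := pv_insert_values_eq td uri _ hcont
          have hgk2 : ∀ i ∈ g2.keys, (0 ≤ i ∧ i ≤ k)
              ∨ i ∈ (td.insert uri (n + (td.size : Int))).values := by
            intro i hi
            rcases (hmemg2 i).mp hi with rfl | rfl | hi
            · exact Or.inl ⟨hk0, le_refl _⟩
            · exact Or.inr (by rw [hvapp]; simp)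
            · rcases hgk i hi with h | h
              · exact Or.inl h
              · exact Or.inr (by rw [hvapp]; exact List.mem_append_left _ h)
          have hvk2 : ∀ v ∈ (td.insert uri (n + (td.size : Int))).values, v ∈ g2.keys := by
            intro v hv
            rw [hvapp] at hv
            rcases List.mem_append.mp hv with h | h
            · exact (hmemg2 v).mpr (Or.inr (Or.inr (hvk v h)))
            · simp at h
              exact (hmemg2 v).mpr (Or.inr (Or.inl h))
          have hD2 : ∀ u v,
              (pvAsg n (td.insert uri (n + (td.size : Int))) tl).get? u = some v →
              D.get? u = some v := by
            intro u v h
            exact hD u v (by rw [hasg2]; exact h)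
          obtain ⟨e1, e3, e4⟩ :=
            ih g2 (td.insert uri (n + (td.size : Int))) k hk0 hkn hvals2 hgk2 hvk2 hD2
          refine ⟨?_, ?_, ?_⟩
          · show pvAInner k (pvAStep k (g, n + (td.size : Int), td) uri) tl = _
            rw [hstepA]
            have hnext1 : (n + (td.size : Int)) + 1
                = n + ((td.insert uri (n + (td.size : Int))).size : Int) := by
              rw [hsize2]; push_cast; ring
            rw [hnext1, e1, hasg2]
            show (pvBInner D k g2 tl, _, _) = (pvBInner D k (pvBStep D k g uri) tl, _, _)
            rw [hstepB]
          · show ∀ i ∈ (pvBInner D k (pvBStep D k g uri) tl).keys, _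
            rw [hstepB, hasg2]; exact e3
          · show ∀ v ∈ (pvAsg n td (uri :: tl)).values,
              v ∈ (pvBInner D k (pvBStep D k g uri) tl).keys
            rw [hstepB, hasg2]; exact e4

-- A's outer loop agrees with the reference two-pass build
theorem pv_outer_main (D : PySem.Dict String Int) (n : Int)
    (rest : List (List String)) :
    forall (g : PySem.Dict Int (List Int)) (td : PySem.Dict String Int) (k : Int),
    0 ≤ k → k + (rest.length : Int) = n →
    td.values = PySem.List.pyRange n (n + (td.size : Int)) 1 →
    (∀ i ∈ g.keys, (0 ≤ i ∧ i < k) ∨ i ∈ td.values) →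
    (∀ v ∈ td.values, v ∈ g.keys) →
    (∀ u v, (pvAsgAll n td rest).get? u = some v → D.get? u = some v) →
    pvAOuter (g, n + (td.size : Int), td) k rest
      = (pvBOuter D g k rest, n + ((pvAsgAll n td rest).size : Int), pvAsgAll n td rest) := by
  induction rest with
  | nil =>
      intro g td k hk0 hkn hvals hgk hvk hD
      rfl
  | cons tl rest ih =>
      intro g td k hk0 hkn hvals hgk hvk hD
      have hkn' : k < n := by
        simp only [List.length_cons] at hkn; push_cast at hkn; omega
      have hgk1 : ∀ i ∈ (g.insert k ([] : List Int)).keys,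
          (0 ≤ i ∧ i ≤ k) ∨ i ∈ td.values := by
        intro i hi
        rcases (PySem.Dict.mem_keys_insert g k i []).mp hi with rfl | hi
        · exact Or.inl ⟨hk0, le_refl _⟩
        · rcases hgk i hi with ⟨h1, h2⟩ | h
          · exact Or.inl ⟨h1, le_of_lt h2⟩
          · exact Or.inr h
      have hvk1 : ∀ v ∈ td.values, v ∈ (g.insert k ([] : List Int)).keys := by
        intro v hv
        exact (PySem.Dict.mem_keys_insert g k v []).mpr (Or.inr (hvk v hv))
      have hasgall : pvAsgAll n td (tl :: rest) = pvAsgAll n (pvAsg n td tl) rest := rfl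
      have hDin : ∀ u v, (pvAsg n td tl).get? u = some v → D.get? u = some v := by
        intro u v h
        exact hD u v (by rw [hasgall]; exact pv_asgAll_preserve n rest _ u v h)
      obtain ⟨e1, e3, e4⟩ :=
        pv_inner_main D n tl (g.insert k ([] : List Int)) td k hk0 hkn' hvals hgk1 hvk1 hDin
      show pvAOuter (pvAInner k (g.insert k [], n + (td.size : Int), td) tl) (k + 1) rest = _
      rw [e1]
      have hgk' : ∀ i ∈ (pvBInner D k (g.insert k ([] : List Int)) tl).keys,
          (0 ≤ i ∧ i < k + 1) ∨ i ∈ (pvAsg n td tl).values := by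
        intro i hi
        rcases e3 i hi with ⟨h1, h2⟩ | h
        · exact Or.inl ⟨h1, by omega⟩
        · exact Or.inr h
      have hkn1 : (k + 1) + ((rest.length : Nat) : Int) = n := by
        simp only [List.length_cons] at hkn; push_cast at hkn ⊢; omega
      have hvals1 := pv_asg_vals n tl td hvals
      have := ih (pvBInner D k (g.insert k ([] : List Int)) tl) (pvAsg n td tl) (k + 1)
        (by omega) hkn1 hvals1 hgk' e4
        (by intro u v h; exact hD u v (by rw [hasgall]; exact h))
      rw [this, hasgall]
      rfl

-- bridge: an index loop over range(len(xs)) reading xs[j] is a loop over enumerate(xs)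
theorem pv_foldl_pyRange_enum {a b : Type} (xs : List a) (d : a) (F : b → Int → a → b)
    (init : b) :
    (PySem.List.pyRange 0 (xs.length : Int) 1).foldl
        (fun st j => F st j (PySem.List.pyGetD xs j d)) init
      = (PySem.List.enumerate xs 0).foldl (fun st p => F st p.1 p.2) init := by
  rw [PySem.List.enumerate_eq_map_pyRange xs d, List.foldl_map]
  rfl

-- characterisation of port A in terms of pvAOuter
theorem pv_portA_char (pl : List (List (String × List (List (String × String))))) :
    make_graph_dict pl
      = (((pvAOuter (PySem.Dict.empty, (pl.length : Int), PySem.Dict.empty) 0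
             (pl.map pvGetTracks)).1.items,
          (pvAOuter (PySem.Dict.empty, (pl.length : Int), PySem.Dict.empty) 0
             (pl.map pvGetTracks)).2.2.items,
          (PySem.Dict.ofList
            (((pvAOuter (PySem.Dict.empty, (pl.length : Int), PySem.Dict.empty) 0
                 (pl.map pvGetTracks)).2.2.values).zip
              (pvAOuter (PySem.Dict.empty, (pl.length : Int), PySem.Dict.empty) 0
                 (pl.map pvGetTracks)).2.2.keys)).items)) := by
  have h1 : (PySem.List.pyRange 0 (pl.length : Int) 1).foldl
        (fun st pid =>
          let g := st.1.insert pid ([] : List Int)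
          let track_list := pvGetTracks (PySem.List.pyGetD pl pid [])
          (PySem.List.enumerate track_list 0).foldl (fun st2 p => pvAStep pid st2 p.2)
            (g, st.2.1, st.2.2))
        (PySem.Dict.empty, (pl.length : Int), PySem.Dict.empty)
      = (PySem.List.enumerate pl 0).foldl
        (fun st p =>
          (PySem.List.enumerate (pvGetTracks p.2) 0).foldl (fun st2 q => pvAStep p.1 st2 q.2)
            (st.1.insert p.1 [], st.2.1, st.2.2))
        (PySem.Dict.empty, (pl.length : Int), PySem.Dict.empty) :=
    pv_foldl_pyRange_enum pl []
      (fun st j x =>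
        (PySem.List.enumerate (pvGetTracks x) 0).foldl (fun st2 q => pvAStep j st2 q.2)
          (st.1.insert j [], st.2.1, st.2.2))
      (PySem.Dict.empty, (pl.length : Int), PySem.Dict.empty)
  have h2 := pv_aouter_bridge pl 0 (PySem.Dict.empty, (pl.length : Int), PySem.Dict.empty)
  show (((PySem.List.pyRange 0 (pl.length : Int) 1).foldl
        (fun st pid =>
          let g := st.1.insert pid ([] : List Int)
          let track_list := pvGetTracks (PySem.List.pyGetD pl pid [])
          (PySem.List.enumerate track_list 0).foldl (fun st2 p => pvAStep pid st2 p.2)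
            (g, st.2.1, st.2.2))
        (PySem.Dict.empty, (pl.length : Int), PySem.Dict.empty)).1.items, _, _) = _
  rw [h1, h2]

-- ofList of a list with distinct keys keeps the items list
theorem pv_ofList_items {k v : Type} [BEq k] [LawfulBEq k] (L : List (k × v))
    (h : (L.map Prod.fst).Nodup) : (PySem.Dict.ofList L).items = L := by
  unfold PySem.Dict.ofList PySem.Dict.update
  have := PySem.Dict.items_foldl_insert_fresh L Prod.fst Prod.snd PySem.Dict.empty
    (by intro a _; rfl) h
  rw [show (fun (acc : PySem.Dict k v) (p : k × v) => acc.insert p.1 p.2)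
      = (fun (d : PySem.Dict k v) (a : k × v) => d.insert a.1 a.2) from rfl]
  rw [this]
  simp [PySem.Dict.empty]

-- ======= new-B-side lemmas =======

-- enumerate helpers
theorem pv_enum_snd {a : Type} (l : List a) :
    ∀ s : Int, (PySem.List.enumerate l s).map Prod.snd = l := by
  induction l with
  | nil => intro s; rfl
  | cons x xs ih => intro s; simp only [PySem.List.enumerate_cons, List.map_cons, ih]

theorem pv_enum_len {a : Type} (l : List a) :
    ∀ s : Int, (PySem.List.enumerate l s).length = l.length := by
  induction l with
  | nil => intro s; rfl
  | cons x xs ih => intro s; simp only [PySem.List.enumerate_cons, List.length_cons, ih]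

theorem pv_enum_append {a : Type} (l : List a) (y : a) :
    ∀ s : Int, PySem.List.enumerate (l ++ [y]) s
      = PySem.List.enumerate l s ++ [(s + (l.length : Int), y)] := by
  induction l with
  | nil => intro s; simp [PySem.List.enumerate_cons]
  | cons x xs ih =>
      intro s
      simp only [List.cons_append, PySem.List.enumerate_cons, ih, List.length_cons]
      have : s + 1 + (xs.length : Int) = s + ((xs.length + 1 : Nat) : Int) := by push_cast; ring
      rw [this]

theorem pv_enum_get {a : Type} (l : List a) :
    ∀ (s : Int) (i : Nat) (h : i < l.length),
      (PySem.List.enumerate l s)[i]'(by rw [pv_enum_len]; exact h) = (s + (i : Int), l[i]) := by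
  induction l with
  | nil => intro s i h; simp at h
  | cons x xs ih =>
      intro s i h
      cases i with
      | zero => simp [PySem.List.enumerate_cons]
      | succ j =>
          have hj : j < xs.length := by simpa using h
          simp only [PySem.List.enumerate_cons, List.getElem_cons_succ]
          rw [ih (s + 1) j hj]
          congr 1
          push_cast; ring

theorem pv_enum_fst {a : Type} (l : List a) :
    ∀ s : Int, (PySem.List.enumerate l s).map Prod.fst
      = PySem.List.pyRange s (s + (l.length : Int)) 1 := by
  induction l with
  | nil =>
      intro s
      rw [show s + ((List.length (List.nil : List a) : Nat) : Int) = s by simp,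
        PySem.List.pyRange_one_eq_nil (le_refl s)]
      rfl
  | cons x xs ih =>
      intro s
      simp only [PySem.List.enumerate_cons, List.map_cons, ih, List.length_cons]
      have hb : s + (((xs.length + 1 : Nat)) : Int) = (s + 1) + (xs.length : Int) := by
        push_cast; ring
      rw [hb]
      conv_rhs => rw [PySem.List.pyRange_one_cons (by omega)]

-- pass-1 (pvAsg) items are the first-seen uris paired with consecutive ids
theorem pv_asg_items (n : Int) (xs : List String) :
    ∀ (td : PySem.Dict String Int) (K : List String),
    td.items = (PySem.List.enumerate K 0).map (fun q => (q.2, n + q.1)) →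
    (xs.foldl (pvBAssign n) td).items
      = (PySem.List.enumerate (xs.foldl PySem.Set.add K) 0).map (fun q => (q.2, n + q.1)) := by
  induction xs with
  | nil => intro td K h; exact h
  | cons u xs ih =>
      intro td K h
      have hkeys : td.keys = K := by
        show td.items.map Prod.fst = K
        rw [h, List.map_map]
        have : (Prod.fst ∘ fun q : Int × String => (q.2, n + q.1)) = Prod.snd := by
          funext q; rfl
        rw [this, pv_enum_snd]
      have hsz : td.size = K.length := by
        show td.items.length = K.length
        rw [h, List.length_map, pv_enum_len]
      simp only [List.foldl_cons]
      by_cases hm : u ∈ K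
      · have hc : td.contains u = true := by
          rw [PySem.Dict.contains_iff_mem_keys, hkeys]; exact hm
        have h1 : pvBAssign n td u = td := by unfold pvBAssign; rw [hc]; simp
        have h2 : PySem.Set.add K u = K := by simp [PySem.Set.add, hm]
        rw [h1, h2]
        exact ih td K h
      · have hc : td.contains u = false := by
          rcases hcc : td.contains u with _ | _
          · rfl
          · exact absurd (hkeys ▸ (PySem.Dict.contains_iff_mem_keys td u).mp hcc) hm
        have h1 : pvBAssign n td u = td.insert u (n + (td.size : Int)) := by
          unfold pvBAssign; rw [hc]; simp
        have h2 : PySem.Set.add K u = K ++ [u] := by simp [PySem.Set.add, hm]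
        rw [h1, h2]
        apply ih
        rw [PySem.Dict.items_insert_of_not_contains td _ hc, h, hsz,
          pv_enum_append K u 0, List.map_append]
        simp

theorem pv_asgAll_eq_flatten (n : Int) (ls : List (List String)) (td : PySem.Dict String Int) :
    pvAsgAll n td ls = ls.flatten.foldl (pvBAssign n) td := by
  rw [List.foldl_flatten]
  rfl

theorem pv_TD_items (n : Int) (ls : List (List String)) :
    (pvAsgAll n PySem.Dict.empty ls).items
      = (PySem.List.enumerate (PySem.Set.ofList ls.flatten) 0).map (fun q => (q.2, n + q.1)) := by
  rw [pv_asgAll_eq_flatten, PySem.Set.ofList_eq_foldl]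
  exact pv_asg_items n ls.flatten PySem.Dict.empty [] rfl

theorem pv_TD_keys (n : Int) (ls : List (List String)) :
    (pvAsgAll n PySem.Dict.empty ls).keys = PySem.Set.ofList ls.flatten := by
  show (pvAsgAll n PySem.Dict.empty ls).items.map Prod.fst = _
  rw [pv_TD_items, List.map_map]
  have : (Prod.fst ∘ fun q : Int × String => (q.2, n + q.1)) = Prod.snd := by
    funext q; rfl
  rw [this, pv_enum_snd]

theorem pv_TD_getD (n : Int) (ls : List (List String)) (i : Nat)
    (h : i < (PySem.Set.ofList ls.flatten).length) :
    (pvAsgAll n PySem.Dict.empty ls).getD (PySem.Set.ofList ls.flatten)[i] 0 = n + i := by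
  have hnd : (pvAsgAll n PySem.Dict.empty ls).keys.Nodup := by
    rw [pv_TD_keys]; exact PySem.Set.nodup_ofList _
  have hlen : i < ((PySem.List.enumerate (PySem.Set.ofList ls.flatten) 0).map
      (fun q : Int × String => (q.2, n + q.1))).length := by
    rw [List.length_map, pv_enum_len]; exact h
  have hmem : ((PySem.Set.ofList ls.flatten)[i], n + (i : Int))
      ∈ (pvAsgAll n PySem.Dict.empty ls).items := by
    rw [pv_TD_items]
    have := List.getElem_mem hlen
    rwa [List.getElem_map, pv_enum_get _ 0 i h, zero_add] at this
  exact PySem.Dict.getD_of_mem_items _ hmem hnd 0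

theorem pv_TD_shape (n : Int) (ls : List (List String)) (u : String) (hu : u ∈ ls.flatten) :
    ∃ i : Nat, ∃ hi : i < (PySem.Set.ofList ls.flatten).length,
      (PySem.Set.ofList ls.flatten)[i] = u
      ∧ (pvAsgAll n PySem.Dict.empty ls).getD u 0 = n + i := by
  have hu2 : u ∈ PySem.Set.ofList ls.flatten := (PySem.Set.mem_ofList _ _).mpr hu
  obtain ⟨i, hi, hgi⟩ := List.mem_iff_getElem.mp hu2
  exact ⟨i, hi, hgi, by rw [← hgi]; exact pv_TD_getD n ls i hi⟩

theorem pv_TD_inj (n : Int) (ls : List (List String)) (u u' : String)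
    (hu : u ∈ ls.flatten) (hu' : u' ∈ ls.flatten)
    (h : (pvAsgAll n PySem.Dict.empty ls).getD u 0 = (pvAsgAll n PySem.Dict.empty ls).getD u' 0) :
    u = u' := by
  obtain ⟨i, hi, hgi, hdi⟩ := pv_TD_shape n ls u hu
  obtain ⟨j, hj, hgj, hdj⟩ := pv_TD_shape n ls u' hu'
  rw [hdi, hdj] at h
  have hij : i = j := by omega
  subst hij
  rw [← hgi, ← hgj]

-- ======= members characterisation =======

theorem pv_mems_bounds (u : String) (rest : List (List String)) :
    ∀ k : Int, ∀ x ∈ pvMems k rest u, k ≤ x ∧ x < k + rest.length := by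
  induction rest with
  | nil => intro k x hx; simp [pvMems] at hx
  | cons tl rest ih =>
      intro k x hx
      simp only [pvMems, List.mem_append] at hx
      rcases hx with hx | hx
      · have : x = k := by
          by_cases h : u ∈ tl <;> simp [h] at hx
          exact hx
        simp only [List.length_cons]
        push_cast
        omega
      · have := ih (k + 1) x hx
        simp only [List.length_cons]
        push_cast at this ⊢
        omega

theorem pv_set_add_new (s : List Int) (x : Int) (h : x ∉ s) :
    PySem.Set.add s x = s ++ [x] := by simp [PySem.Set.add, h]

theorem pv_set_add_mem (s : List Int) (x : Int) (h : x ∈ s) :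
    PySem.Set.add s x = s := by simp [PySem.Set.add, h]

theorem pv_minner_getD (k : Int) (u : String) (tl : List String) :
    ∀ M : PySem.Dict String (List Int),
    (tl.foldl (pvMstep k) M).getD u []
      = if u ∈ tl ∧ (M.getD u []).getLast? ≠ some k then M.getD u [] ++ [k]
        else M.getD u [] := by
  induction tl with
  | nil => intro M; simp
  | cons u' tl ih =>
      intro M
      simp only [List.foldl_cons]
      by_cases hu : u' = u
      · subst hu
        by_cases hlast : (M.getD u' []).getLast? = some k
        · have hstep : pvMstep k M u' = M.setdefault u' [] := by
            simp only [pvMstep]; simp [hlast]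
          have hg : (M.setdefault u' []).getD u' [] = M.getD u' [] :=
            PySem.Dict.getD_setdefault_self M u' [] []
          rw [hstep, ih, hg]
          simp [hlast]
        · have hstep : pvMstep k M u'
              = (M.setdefault u' []).modify u' [] (fun l => l ++ [k]) := by
            simp only [pvMstep]; simp [hlast]
          have hg : ((M.setdefault u' []).modify u' [] (fun l => l ++ [k])).getD u' []
              = M.getD u' [] ++ [k] := by
            rw [PySem.Dict.getD_modify_self, PySem.Dict.getD_setdefault_self]
          have hlast2 : (M.getD u' [] ++ [k]).getLast? = some k := List.getLast?_concat
          rw [hstep, ih, hg]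
          simp [hlast, hlast2]
      · have hne : u ≠ u' := fun h => hu h.symm
        have hstep : (pvMstep k M u').getD u [] = M.getD u [] := by
          simp only [pvMstep]
          have hsd : (M.setdefault u' []).getD u [] = M.getD u [] := by
            rw [PySem.Dict.getD_eq_get?_getD, PySem.Dict.get?_setdefault_of_ne M [] hne,
              ← PySem.Dict.getD_eq_get?_getD]
          split
          · exact hsd
          · rw [PySem.Dict.getD_modify, if_neg hne, hsd]
        rw [ih, hstep]
        simp [List.mem_cons, hne]

theorem pv_mouter_getD (u : String) (rest : List (List String)) :
    ∀ (k : Int) (M : PySem.Dict String (List Int)),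
    (∀ x ∈ M.getD u [], x < k) →
    (pvMOuter M k rest).getD u [] = M.getD u [] ++ pvMems k rest u := by
  induction rest with
  | nil => intro k M hb; simp [pvMOuter, pvMems]
  | cons tl rest ih =>
      intro k M hb
      show (pvMOuter (tl.foldl (pvMstep k) M) (k + 1) rest).getD u [] = _
      have hlast : ¬ ((M.getD u []).getLast? = some k) := fun h =>
        absurd (hb k (List.mem_of_getLast? h)) (lt_irrefl k)
      have hval : (tl.foldl (pvMstep k) M).getD u []
          = M.getD u [] ++ (if u ∈ tl then [k] else []) := by
        rw [pv_minner_getD]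
        by_cases h : u ∈ tl <;> simp [h, hlast]
      have hb2 : ∀ x ∈ (tl.foldl (pvMstep k) M).getD u [], x < k + 1 := by
        rw [hval]
        intro x hx
        rcases List.mem_append.mp hx with h | h
        · exact lt_trans (hb x h) (by omega)
        · by_cases hmem : u ∈ tl <;> simp [hmem] at h
          omega
      rw [ih (k + 1) _ hb2, hval, List.append_assoc]
      rfl

theorem pv_minner_keys (k : Int) (tl : List String) :
    ∀ M : PySem.Dict String (List Int),
    (tl.foldl (pvMstep k) M).keys = PySem.Set.update M.keys tl := by
  induction tl with
  | nil => intro M; rfl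
  | cons u' tl ih =>
      intro M
      simp only [List.foldl_cons]
      rw [ih]
      have hupd : PySem.Set.update M.keys (u' :: tl)
          = PySem.Set.update (PySem.Set.add M.keys u') tl := rfl
      rw [hupd]
      congr 1
      by_cases hc : M.contains u' = true
      · have hmem : u' ∈ M.keys := (PySem.Dict.contains_iff_mem_keys M u').mp hc
        have h1 : M.setdefault u' [] = M := PySem.Dict.setdefault_of_contains M [] hc
        have h2 : PySem.Set.add M.keys u' = M.keys := by simp [PySem.Set.add, hmem]
        simp only [pvMstep]
        rw [h1, h2]
        split
        · rfl
        · rw [PySem.Dict.keys_modify, PySem.Dict.keys_insert_of_contains]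
          exact hc
      · have hc' : M.contains u' = false := by
          rcases h : M.contains u' with _ | _
          · rfl
          · exact absurd h hc
        have hmem : u' ∉ M.keys := fun h =>
          absurd ((PySem.Dict.contains_iff_mem_keys M u').mpr h) (by rw [hc']; simp)
        have h1 : M.setdefault u' [] = M.insert u' [] :=
          PySem.Dict.setdefault_of_not_contains M [] hc'
        have h2 : PySem.Set.add M.keys u' = M.keys ++ [u'] := by simp [PySem.Set.add, hmem]
        have h3 : (M.insert u' []).keys = M.keys ++ [u'] :=
          PySem.Dict.keys_insert_of_not_contains M [] hc'
        simp only [pvMstep]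
        rw [h1, h2]
        split
        · exact h3
        · rw [PySem.Dict.keys_modify, PySem.Dict.keys_insert_of_contains, h3]
          rw [PySem.Dict.contains_insert]
          simp

theorem pv_mouter_keys (rest : List (List String)) :
    ∀ (k : Int) (M : PySem.Dict String (List Int)),
    (pvMOuter M k rest).keys = PySem.Set.update M.keys rest.flatten := by
  induction rest with
  | nil => intro k M; rfl
  | cons tl rest ih =>
      intro k M
      show (pvMOuter (tl.foldl (pvMstep k) M) (k + 1) rest).keys = _
      rw [ih, pv_minner_keys]
      show PySem.Set.update (PySem.Set.update M.keys tl) rest.flatten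
        = PySem.Set.update M.keys (tl ++ rest.flatten)
      simp [PySem.Set.update, List.foldl_append]

theorem pv_set_foldl_add_nodup :
    ∀ (xs : List Int) (s : List Int), (∀ x ∈ xs, x ∉ s) → xs.Nodup →
    xs.foldl PySem.Set.add s = s ++ xs := by
  intro xs
  induction xs with
  | nil => intro s _ _; simp
  | cons x xs ih =>
      intro s hdis hnd
      obtain ⟨hx, hnd'⟩ := List.nodup_cons.mp hnd
      simp only [List.foldl_cons]
      rw [pv_set_add_new s x (hdis x (by simp))]
      rw [ih (s ++ [x]) ?_ hnd']
      · simp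
      · intro y hy hmem
        rcases List.mem_append.mp hmem with h | h
        · exact hdis y (by simp [hy]) h
        · simp at h
          subst h
          exact hx hy

theorem pv_set_fix (l : List Int) (h : l.Nodup) : PySem.Set.ofList l = l := by
  rw [PySem.Set.ofList_eq_foldl]
  rw [pv_set_foldl_add_nodup l [] (by simp) h]
  simp

theorem pv_mems_nodup (u : String) (rest : List (List String)) :
    ∀ k : Int, (pvMems k rest u).Nodup := by
  induction rest with
  | nil => intro k; simp [pvMems]
  | cons tl rest ih =>
      intro k
      by_cases h : u ∈ tl
      · simp only [pvMems, h, if_pos, List.singleton_append, List.nodup_cons]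
        exact ⟨fun hk => absurd ((pv_mems_bounds u rest (k + 1) k hk).1) (by omega), ih (k + 1)⟩
      · simp [pvMems, h, ih (k + 1)]

-- ======= keys of the two graph builds agree =======

theorem pv_keys_modify_mem {ν : Type} (d : PySem.Dict Int ν) (x : Int) (d0 : ν) (f : ν → ν)
    (h : d.contains x = true) : (d.modify x d0 f).keys = d.keys := by
  rw [PySem.Dict.keys_modify, PySem.Dict.keys_insert_of_contains _ _ h]

theorem pv_bstep_keys (D : PySem.Dict String Int) (k : Int)
    (g : PySem.Dict Int (List Int)) (u : String) (hk : g.contains k = true) :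
    (pvBStep D k g u).keys
      = if g.contains (D.getD u 0) then g.keys else g.keys ++ [D.getD u 0] := by
  by_cases hc : g.contains (D.getD u 0) = true
  · show (((if g.contains (D.getD u 0) then g
        else g.insert (D.getD u 0) ([] : List Int)).modify (D.getD u 0) []
          (fun s => PySem.Set.add s k)).modify k []
          (fun s => PySem.Set.add s (D.getD u 0))).keys = _
    rw [if_pos hc, if_pos hc]
    rw [pv_keys_modify_mem _ k _ _ (by rw [PySem.Dict.contains_modify]; simp [hk]),
      pv_keys_modify_mem _ _ _ _ hc]
  · have hc' : g.contains (D.getD u 0) = false := by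
      rcases h : g.contains (D.getD u 0) with _ | _
      · rfl
      · exact absurd h hc
    show (((if g.contains (D.getD u 0) then g
        else g.insert (D.getD u 0) ([] : List Int)).modify (D.getD u 0) []
          (fun s => PySem.Set.add s k)).modify k []
          (fun s => PySem.Set.add s (D.getD u 0))).keys = _
    rw [if_neg (by rw [hc']; simp), if_neg (by rw [hc']; simp)]
    rw [pv_keys_modify_mem _ k _ _ (by
        rw [PySem.Dict.contains_modify, PySem.Dict.contains_insert]
        simp [hk]),
      pv_keys_modify_mem _ _ _ _ (PySem.Dict.contains_insert_self g _ _),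
      PySem.Dict.keys_insert_of_not_contains g _ hc']

theorem pv_nstep_keys (D : PySem.Dict String Int) (M : PySem.Dict String (List Int))
    (g : PySem.Dict Int (List Int)) (u : String) :
    (pvNStep D M g u).keys
      = if g.contains (D.getD u 0) then g.keys else g.keys ++ [D.getD u 0] := by
  by_cases hc : g.contains (D.getD u 0) = true
  · show (if g.contains (D.getD u 0) then g
      else g.insert (D.getD u 0) (PySem.Set.ofList (M.getD u []))).keys = _
    rw [if_pos hc, if_pos hc]
  · have hc' : g.contains (D.getD u 0) = false := by
      rcases h : g.contains (D.getD u 0) with _ | _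
      · rfl
      · exact absurd h hc
    show (if g.contains (D.getD u 0) then g
      else g.insert (D.getD u 0) (PySem.Set.ofList (M.getD u []))).keys = _
    rw [if_neg (by rw [hc']; simp), if_neg (by rw [hc']; simp),
      PySem.Dict.keys_insert_of_not_contains g _ hc']

theorem pv_keys_inner (D : PySem.Dict String Int) (M : PySem.Dict String (List Int))
    (k : Int) (tl : List String) :
    ∀ (gO gN : PySem.Dict Int (List Int)),
    gO.keys = gN.keys → k ∈ gO.keys →
    (pvBInner D k gO tl).keys = (tl.foldl (pvNStep D M) gN).keys
      ∧ k ∈ (pvBInner D k gO tl).keys := by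
  induction tl with
  | nil => intro gO gN h hk; exact ⟨h, hk⟩
  | cons u tl ih =>
      intro gO gN h hk
      have hcs : gO.contains (D.getD u 0) = gN.contains (D.getD u 0) := by
        rw [PySem.Dict.contains_eq_decide_mem_keys, PySem.Dict.contains_eq_decide_mem_keys, h]
      have hOld := pv_bstep_keys D k gO u ((PySem.Dict.contains_iff_mem_keys gO k).mpr hk)
      have hNew := pv_nstep_keys D M gN u
      have hke : (pvBStep D k gO u).keys = (pvNStep D M gN u).keys := by
        rw [hOld, hNew, hcs, h]
      have hkm : k ∈ (pvBStep D k gO u).keys := by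
        rw [hOld]
        split
        · exact hk
        · exact List.mem_append_left _ hk
      have := ih (pvBStep D k gO u) (pvNStep D M gN u) hke hkm
      exact this

theorem pv_keys_outer (D : PySem.Dict String Int) (M : PySem.Dict String (List Int))
    (rest : List (List String)) :
    ∀ (k : Int) (gO gN : PySem.Dict Int (List Int)),
    gO.keys = gN.keys →
    (pvBOuter D gO k rest).keys = (pvNOuter D M gN k rest).keys := by
  induction rest with
  | nil => intro k gO gN h; exact h
  | cons tl rest ih =>
      intro k gO gN h
      show (pvBOuter D (pvBInner D k (gO.insert k []) tl) (k + 1) rest).keys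
        = (pvNOuter D M (tl.foldl (pvNStep D M)
            (gN.insert k (PySem.Set.ofList (tl.map (fun u => D.getD u 0))))) (k + 1) rest).keys
      have hcs : gO.contains k = gN.contains k := by
        rw [PySem.Dict.contains_eq_decide_mem_keys, PySem.Dict.contains_eq_decide_mem_keys, h]
      have h1 : (gO.insert k ([] : List Int)).keys
          = (gN.insert k (PySem.Set.ofList (tl.map (fun u => D.getD u 0)))).keys := by
        by_cases hc : gO.contains k = true
        · rw [PySem.Dict.keys_insert_of_contains _ _ hc,
            PySem.Dict.keys_insert_of_contains _ _ (hcs ▸ hc), h]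
        · have hc' : gO.contains k = false := by
            rcases hh : gO.contains k with _ | _
            · rfl
            · exact absurd hh hc
          rw [PySem.Dict.keys_insert_of_not_contains _ _ hc',
            PySem.Dict.keys_insert_of_not_contains _ _ (hcs ▸ hc'), h]
      have h2 : k ∈ (gO.insert k ([] : List Int)).keys :=
        (PySem.Dict.mem_keys_insert gO k k []).mpr (Or.inl rfl)
      obtain ⟨hke, _⟩ := pv_keys_inner D M k tl (gO.insert k []) _ h1 h2
      exact ih (k + 1) _ _ hke

theorem pv_ninner_nodup (D : PySem.Dict String Int) (M : PySem.Dict String (List Int))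
    (tl : List String) :
    ∀ g : PySem.Dict Int (List Int), g.keys.Nodup → (tl.foldl (pvNStep D M) g).keys.Nodup := by
  induction tl with
  | nil => intro g h; exact h
  | cons u tl ih =>
      intro g h
      apply ih
      show (if g.contains (D.getD u 0) then g
        else g.insert (D.getD u 0) (PySem.Set.ofList (M.getD u []))).keys.Nodup
      split
      · exact h
      · exact PySem.Dict.nodup_keys_insert g _ _ h

theorem pv_nodup_keys_nouter (D : PySem.Dict String Int) (M : PySem.Dict String (List Int))
    (rest : List (List String)) :
    ∀ (k : Int) (g : PySem.Dict Int (List Int)),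
    g.keys.Nodup → (pvNOuter D M g k rest).keys.Nodup := by
  induction rest with
  | nil => intro k g h; exact h
  | cons tl rest ih =>
      intro k g h
      exact ih (k + 1) _ (pv_ninner_nodup D M tl _ (PySem.Dict.nodup_keys_insert g _ _ h))

theorem pv_ninner_shape (D : PySem.Dict String Int) (M : PySem.Dict String (List Int))
    (n : Int) (full : List String) (tl : List String) (htl : ∀ u ∈ tl, u ∈ full) :
    ∀ g : PySem.Dict Int (List Int),
    (∀ x ∈ g.keys, (0 ≤ x ∧ x < n) ∨ ∃ u, u ∈ full ∧ D.getD u 0 = x) →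
    ∀ x ∈ (tl.foldl (pvNStep D M) g).keys,
      (0 ≤ x ∧ x < n) ∨ ∃ u, u ∈ full ∧ D.getD u 0 = x := by
  induction tl with
  | nil => intro g h; exact h
  | cons u tl ih =>
      intro g h
      apply ih
      · intro u' hu'; exact htl u' (List.mem_cons_of_mem _ hu')
      · intro x hx
        have : x ∈ (if g.contains (D.getD u 0) then g
            else g.insert (D.getD u 0) (PySem.Set.ofList (M.getD u []))).keys := hx
        split at this
        · exact h x this
        · rcases (PySem.Dict.mem_keys_insert g _ x _).mp this with rfl | hxg
          · exact Or.inr ⟨u, htl u (List.mem_cons_self), rfl⟩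
          · exact h x hxg

theorem pv_keys_shape (D : PySem.Dict String Int) (M : PySem.Dict String (List Int))
    (n : Int) (full : List String) (rest : List (List String)) :
    ∀ (k : Int) (g : PySem.Dict Int (List Int)),
    0 ≤ k → k + (rest.length : Int) ≤ n →
    (∀ u ∈ rest.flatten, u ∈ full) →
    (∀ x ∈ g.keys, (0 ≤ x ∧ x < n) ∨ ∃ u, u ∈ full ∧ D.getD u 0 = x) →
    ∀ x ∈ (pvNOuter D M g k rest).keys, (0 ≤ x ∧ x < n) ∨ ∃ u, u ∈ full ∧ D.getD u 0 = x := by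
  induction rest with
  | nil => intro k g _ _ _ h; exact h
  | cons tl rest ih =>
      intro k g hk0 hkn hsub h
      have hlc : (((tl :: rest).length : Nat) : Int) = ((rest.length : Nat) : Int) + 1 := by
        push_cast [List.length_cons]; ring
      have hlen : k + ((rest.length : Nat) : Int) ≤ n ∧ k < n := by
        rw [hlc] at hkn; omega
      apply ih (k + 1) _ (by omega) (by omega)
      · intro u hu
        exact hsub u (by rw [List.flatten_cons]; exact List.mem_append_right _ hu)
      · apply pv_ninner_shape D M n full tl
        · intro u hu
          exact hsub u (by rw [List.flatten_cons]; exact List.mem_append_left _ hu)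
        · intro x hx
          rcases (PySem.Dict.mem_keys_insert g k x _).mp hx with rfl | hxg
          · exact Or.inl ⟨hk0, hlen.2⟩
          · exact h x hxg

-- ======= values: frame lemmas =======

theorem pv_bstep_getD_frame (D : PySem.Dict String Int) (k : Int)
    (g : PySem.Dict Int (List Int)) (u : String) (x : Int)
    (hx : x ≠ k) (ht : D.getD u 0 ≠ x) :
    (pvBStep D k g u).getD x [] = g.getD x [] := by
  show (((if g.contains (D.getD u 0) then g
      else g.insert (D.getD u 0) ([] : List Int)).modify (D.getD u 0) []
        (fun s => PySem.Set.add s k)).modify k []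
        (fun s => PySem.Set.add s (D.getD u 0))).getD x [] = _
  rw [PySem.Dict.getD_modify, if_neg hx, PySem.Dict.getD_modify,
    if_neg (fun h => ht h.symm)]
  split
  · rfl
  · rw [PySem.Dict.getD_insert, if_neg (fun h => ht h.symm)]

theorem pv_old_frame_inner (D : PySem.Dict String Int) (k : Int) (tl : List String) (x : Int)
    (hx : x ≠ k) (htl : ∀ u ∈ tl, D.getD u 0 ≠ x) :
    ∀ g : PySem.Dict Int (List Int), (pvBInner D k g tl).getD x [] = g.getD x [] := by
  induction tl with
  | nil => intro g; rfl
  | cons u tl ih =>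
      intro g
      show (pvBInner D k (pvBStep D k g u) tl).getD x [] = _
      rw [ih (fun u' h => htl u' (List.mem_cons_of_mem _ h)) _,
        pv_bstep_getD_frame D k g u x hx (htl u List.mem_cons_self)]

theorem pv_old_frame (D : PySem.Dict String Int) (rest : List (List String)) :
    ∀ (k : Int) (g : PySem.Dict Int (List Int)) (x : Int),
    (∀ m : Nat, m < rest.length → x ≠ k + (m : Int)) →
    (∀ u ∈ rest.flatten, D.getD u 0 ≠ x) →
    (pvBOuter D g k rest).getD x [] = g.getD x [] := by
  induction rest with
  | nil => intro k g x _ _; rfl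
  | cons tl rest ih =>
      intro k g x hpid htid
      have hxk : x ≠ k := by
        have := hpid 0 (by simp)
        simpa using this
      show (pvBOuter D (pvBInner D k (g.insert k []) tl) (k + 1) rest).getD x [] = _
      rw [ih (k + 1) _ x ?_ ?_]
      · rw [pv_old_frame_inner D k tl x hxk
          (fun u hu => htid u (by rw [List.flatten_cons]; exact List.mem_append_left _ hu)),
          PySem.Dict.getD_insert, if_neg hxk]
      · intro m hm heq
        apply hpid (m + 1) (by simp only [List.length_cons]; omega)
        rw [heq]; push_cast; ring
      · intro u hu
        exact htid u (by rw [List.flatten_cons]; exact List.mem_append_right _ hu)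

theorem pv_new_keep_inner (D : PySem.Dict String Int) (M : PySem.Dict String (List Int))
    (tl : List String) (x : Int) :
    ∀ g : PySem.Dict Int (List Int), g.contains x = true →
    (tl.foldl (pvNStep D M) g).getD x [] = g.getD x []
      ∧ (tl.foldl (pvNStep D M) g).contains x = true := by
  induction tl with
  | nil => intro g h; exact ⟨rfl, h⟩
  | cons u tl ih =>
      intro g h
      simp only [List.foldl_cons]
      by_cases hc : g.contains (D.getD u 0) = true
      · have e : pvNStep D M g u = g := by
          show (if g.contains (D.getD u 0) then g
            else g.insert (D.getD u 0) (PySem.Set.ofList (M.getD u []))) = g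
          rw [if_pos hc]
        rw [e]
        exact ih g h
      · have hne : x ≠ D.getD u 0 := fun heq => hc (heq ▸ h)
        have e : pvNStep D M g u = g.insert (D.getD u 0) (PySem.Set.ofList (M.getD u [])) := by
          show (if g.contains (D.getD u 0) then g
            else g.insert (D.getD u 0) (PySem.Set.ofList (M.getD u []))) = _
          rw [if_neg hc]
        rw [e]
        have hg : (g.insert (D.getD u 0) (PySem.Set.ofList (M.getD u []))).getD x []
            = g.getD x [] := by rw [PySem.Dict.getD_insert, if_neg hne]
        have hcn : (g.insert (D.getD u 0) (PySem.Set.ofList (M.getD u []))).contains x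
            = true := by rw [PySem.Dict.contains_insert, h]; simp
        obtain ⟨h1, h2⟩ := ih _ hcn
        exact ⟨h1.trans hg, h2⟩

theorem pv_new_frame_inner (D : PySem.Dict String Int) (M : PySem.Dict String (List Int))
    (tl : List String) (x : Int) (htl : ∀ u ∈ tl, D.getD u 0 ≠ x) :
    ∀ g : PySem.Dict Int (List Int),
    (tl.foldl (pvNStep D M) g).getD x [] = g.getD x []
      ∧ (tl.foldl (pvNStep D M) g).contains x = g.contains x := by
  induction tl with
  | nil => intro g; exact ⟨rfl, rfl⟩
  | cons u tl ih =>
      intro g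
      simp only [List.foldl_cons]
      have hne : x ≠ D.getD u 0 := fun heq => htl u List.mem_cons_self heq.symm
      obtain ⟨h1, h2⟩ := ih (fun u' h => htl u' (List.mem_cons_of_mem _ h)) (pvNStep D M g u)
      refine ⟨h1.trans ?_, h2.trans ?_⟩
      · show (if g.contains (D.getD u 0) then g
          else g.insert (D.getD u 0) (PySem.Set.ofList (M.getD u []))).getD x [] = _
        split
        · rfl
        · rw [PySem.Dict.getD_insert, if_neg hne]
      · show (if g.contains (D.getD u 0) then g
          else g.insert (D.getD u 0) (PySem.Set.ofList (M.getD u []))).contains x = _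
        split
        · rfl
        · rw [PySem.Dict.contains_insert]
          simp [hne]

theorem pv_new_keep (D : PySem.Dict String Int) (M : PySem.Dict String (List Int))
    (rest : List (List String)) :
    ∀ (k : Int) (g : PySem.Dict Int (List Int)) (x : Int),
    g.contains x = true →
    (∀ m : Nat, m < rest.length → x ≠ k + (m : Int)) →
    (pvNOuter D M g k rest).getD x [] = g.getD x [] := by
  induction rest with
  | nil => intro k g x _ _; rfl
  | cons tl rest ih =>
      intro k g x h hpid
      have hxk : x ≠ k := by
        have := hpid 0 (by simp)
        simpa using this
      show (pvNOuter D M (tl.foldl (pvNStep D M)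
          (g.insert k (PySem.Set.ofList (tl.map (fun u => D.getD u 0))))) (k + 1) rest).getD x []
        = _
      have hci : (g.insert k (PySem.Set.ofList (tl.map (fun u => D.getD u 0)))).contains x
          = true := by rw [PySem.Dict.contains_insert, h]; simp
      obtain ⟨h1, h2⟩ := pv_new_keep_inner D M tl x _ hci
      rw [ih (k + 1) _ x (by rw [h2]) ?_, h1, PySem.Dict.getD_insert, if_neg hxk]
      intro m hm heq
      apply hpid (m + 1) (by simp only [List.length_cons]; omega)
      rw [heq]; push_cast; ring

-- ======= values: playlist nodes =======

theorem pv_old_inner_self (D : PySem.Dict String Int) (k : Int) :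
    ∀ (tl : List String) (g : PySem.Dict Int (List Int)),
    (∀ u ∈ tl, D.getD u 0 ≠ k) →
    (pvBInner D k g tl).getD k []
      = tl.foldl (fun s u => PySem.Set.add s (D.getD u 0)) (g.getD k []) := by
  intro tl
  induction tl with
  | nil => intro g _; rfl
  | cons u tl ih =>
      intro g htl
      show (pvBInner D k (pvBStep D k g u) tl).getD k [] = _
      rw [ih _ (fun u' h => htl u' (List.mem_cons_of_mem _ h))]
      simp only [List.foldl_cons]
      congr 1
      show (((if g.contains (D.getD u 0) then g
          else g.insert (D.getD u 0) ([] : List Int)).modify (D.getD u 0) []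
            (fun s => PySem.Set.add s k)).modify k []
            (fun s => PySem.Set.add s (D.getD u 0))).getD k [] = _
      rw [PySem.Dict.getD_modify_self]
      congr 1
      rw [PySem.Dict.getD_modify, if_neg (fun h => htl u List.mem_cons_self h.symm)]
      split
      · rfl
      · rw [PySem.Dict.getD_insert, if_neg (fun h => htl u List.mem_cons_self h.symm)]

theorem pv_old_pid (D : PySem.Dict String Int) (n : Int) (rest : List (List String)) :
    ∀ (k : Int) (g : PySem.Dict Int (List Int)) (m : Nat) (hm : m < rest.length),
    0 ≤ k → k + (rest.length : Int) ≤ n →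
    (∀ u ∈ rest.flatten, n ≤ D.getD u 0) →
    (pvBOuter D g k rest).getD (k + (m : Int)) []
      = PySem.Set.ofList ((rest[m]'hm).map (fun u => D.getD u 0)) := by
  induction rest with
  | nil => intro k g m hm; simp at hm
  | cons tl rest ih =>
      intro k g m hm hk0 hkn htd
      have hlc : (((tl :: rest).length : Nat) : Int) = ((rest.length : Nat) : Int) + 1 := by
        push_cast [List.length_cons]; ring
      rw [hlc] at hkn
      have hklt : k < n := by omega
      cases m with
      | zero =>
          have h0 : k + ((0 : Nat) : Int) = k := by simp
          rw [h0]
          show (pvBOuter D (pvBInner D k (g.insert k []) tl) (k + 1) rest).getD k [] = _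
          rw [pv_old_frame D rest (k + 1) _ k ?_ ?_]
          · rw [pv_old_inner_self D k tl _ ?_]
            · rw [PySem.Dict.getD_insert_self]
              simp only [List.getElem_cons_zero]
              rw [PySem.Set.ofList_eq_foldl, List.foldl_map]
            · intro u hu heq
              have := htd u (by rw [List.flatten_cons]; exact List.mem_append_left _ hu)
              omega
          · intro m' _ heq
            have hm0 : (0 : Int) ≤ (m' : Int) := by positivity
            omega
          · intro u hu heq
            have := htd u (by rw [List.flatten_cons]; exact List.mem_append_right _ hu)
            omega
      | succ j =>
          have hj : j < rest.length := by simpa using hm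
          have hshift : k + ((j + 1 : Nat) : Int) = (k + 1) + (j : Int) := by push_cast; ring
          rw [hshift]
          show (pvBOuter D (pvBInner D k (g.insert k []) tl) (k + 1) rest).getD
              ((k + 1) + (j : Int)) [] = _
          rw [ih (k + 1) _ j hj (by omega) (by omega)
            (fun u hu => htd u (by rw [List.flatten_cons]; exact List.mem_append_right _ hu))]
          simp

theorem pv_new_pid (D : PySem.Dict String Int) (M : PySem.Dict String (List Int)) (n : Int)
    (rest : List (List String)) :
    ∀ (k : Int) (g : PySem.Dict Int (List Int)) (m : Nat) (hm : m < rest.length),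
    0 ≤ k → k + (rest.length : Int) ≤ n →
    (∀ u ∈ rest.flatten, n ≤ D.getD u 0) →
    (pvNOuter D M g k rest).getD (k + (m : Int)) []
      = PySem.Set.ofList ((rest[m]'hm).map (fun u => D.getD u 0)) := by
  induction rest with
  | nil => intro k g m hm; simp at hm
  | cons tl rest ih =>
      intro k g m hm hk0 hkn htd
      have hlc : (((tl :: rest).length : Nat) : Int) = ((rest.length : Nat) : Int) + 1 := by
        push_cast [List.length_cons]; ring
      rw [hlc] at hkn
      have hklt : k < n := by omega
      cases m with
      | zero =>
          have h0 : k + ((0 : Nat) : Int) = k := by simp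
          rw [h0]
          show (pvNOuter D M (tl.foldl (pvNStep D M)
              (g.insert k (PySem.Set.ofList (tl.map (fun u => D.getD u 0))))) (k + 1)
                rest).getD k [] = _
          obtain ⟨h1, h2⟩ := pv_new_keep_inner D M tl k
            (g.insert k (PySem.Set.ofList (tl.map (fun u => D.getD u 0))))
            (PySem.Dict.contains_insert_self g _ _)
          rw [pv_new_keep D M rest (k + 1) _ k h2 ?_]
          · rw [h1, PySem.Dict.getD_insert_self]
            simp only [List.getElem_cons_zero]
          · intro m' _ heq
            have hm0 : (0 : Int) ≤ (m' : Int) := by positivity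
            omega
      | succ j =>
          have hj : j < rest.length := by simpa using hm
          have hshift : k + ((j + 1 : Nat) : Int) = (k + 1) + (j : Int) := by push_cast; ring
          rw [hshift]
          show (pvNOuter D M (tl.foldl (pvNStep D M)
              (g.insert k (PySem.Set.ofList (tl.map (fun u => D.getD u 0))))) (k + 1)
                rest).getD ((k + 1) + (j : Int)) [] = _
          rw [ih (k + 1) _ j hj (by omega) (by omega)
            (fun u hu => htd u (by rw [List.flatten_cons]; exact List.mem_append_right _ hu))]
          simp

-- ======= values: track nodes =======

theorem pv_set_add_idem (s : List Int) (x : Int) :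
    PySem.Set.add (PySem.Set.add s x) x = PySem.Set.add s x := by
  by_cases h : x ∈ s
  · rw [pv_set_add_mem s x h, pv_set_add_mem s x h]
  · rw [pv_set_add_new s x h, pv_set_add_mem _ x (by simp)]

theorem pv_old_inner_tid (D : PySem.Dict String Int) (k : Int) (u : String) (x : Int)
    (hux : D.getD u 0 = x) (hxk : x ≠ k) :
    ∀ (tl : List String) (g : PySem.Dict Int (List Int)),
    (∀ u' ∈ tl, D.getD u' 0 = x → u' = u) →
    (pvBInner D k g tl).getD x []
      = if u ∈ tl then PySem.Set.add (g.getD x []) k else g.getD x [] := by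
  intro tl
  induction tl with
  | nil => intro g _; simp [pvBInner]
  | cons u' tl ih =>
      intro g hinj
      show (pvBInner D k (pvBStep D k g u') tl).getD x [] = _
      rw [ih _ (fun v hv hd => hinj v (List.mem_cons_of_mem _ hv) hd)]
      by_cases ht : D.getD u' 0 = x
      · have hu' : u' = u := hinj u' List.mem_cons_self ht
        subst hu'
        have hstep : (pvBStep D k g u').getD x [] = PySem.Set.add (g.getD x []) k := by
          show (((if g.contains (D.getD u' 0) then g
              else g.insert (D.getD u' 0) ([] : List Int)).modify (D.getD u' 0) []
                (fun s => PySem.Set.add s k)).modify k []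
                (fun s => PySem.Set.add s (D.getD u' 0))).getD x [] = _
          rw [PySem.Dict.getD_modify, if_neg hxk, ht, PySem.Dict.getD_modify_self]
          congr 1
          by_cases hc : g.contains x = true
          · rw [if_pos hc]
          · have hc' : g.contains x = false := by
              rcases hh : g.contains x with _ | _
              · rfl
              · exact absurd hh hc
            rw [if_neg (by rw [hc']; simp), PySem.Dict.getD_insert_self,
              PySem.Dict.getD_of_not_contains g _ hc']
        rw [hstep]
        by_cases hm : u' ∈ tl
        · simp only [hm, if_pos, List.mem_cons, true_or]
          rw [pv_set_add_idem]
        · simp [hm]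
      · have hu' : u' ≠ u := fun heq => ht (heq ▸ hux)
        rw [pv_bstep_getD_frame D k g u' x hxk ht]
        by_cases hmem : u ∈ tl
        · simp [hmem, List.mem_cons]
        · simp [hmem, List.mem_cons, (show u ≠ u' from fun h => hu' h.symm)]

theorem pv_old_tid (D : PySem.Dict String Int) (n : Int) (u : String) (x : Int)
    (hux : D.getD u 0 = x) (hnx : n ≤ x) (rest : List (List String)) :
    ∀ (k : Int) (g : PySem.Dict Int (List Int)),
    0 ≤ k → k + (rest.length : Int) ≤ n →
    (∀ u' ∈ rest.flatten, D.getD u' 0 = x → u' = u) →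
    (∀ e ∈ g.getD x [], e < k) →
    (pvBOuter D g k rest).getD x [] = g.getD x [] ++ pvMems k rest u := by
  induction rest with
  | nil => intro k g _ _ _ _; simp [pvBOuter, pvMems]
  | cons tl rest ih =>
      intro k g hk0 hkn hinj hb
      have hlc : (((tl :: rest).length : Nat) : Int) = ((rest.length : Nat) : Int) + 1 := by
        push_cast [List.length_cons]; ring
      rw [hlc] at hkn
      have hxk : x ≠ k := by omega
      show (pvBOuter D (pvBInner D k (g.insert k []) tl) (k + 1) rest).getD x [] = _
      have hgi : (g.insert k ([] : List Int)).getD x [] = g.getD x [] := by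
        rw [PySem.Dict.getD_insert, if_neg hxk]
      have hval : (pvBInner D k (g.insert k []) tl).getD x []
          = g.getD x [] ++ (if u ∈ tl then [k] else []) := by
        rw [pv_old_inner_tid D k u x hux hxk tl _
          (fun v hv hd => hinj v (by rw [List.flatten_cons]; exact List.mem_append_left _ hv) hd),
          hgi]
        by_cases hm : u ∈ tl
        · rw [if_pos hm, if_pos hm,
            pv_set_add_new _ k (fun hkm => absurd (hb k hkm) (lt_irrefl k))]
        · simp [hm]
      have hb2 : ∀ e ∈ (pvBInner D k (g.insert k []) tl).getD x [], e < k + 1 := by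
        rw [hval]
        intro e he
        rcases List.mem_append.mp he with h | h
        · exact lt_trans (hb e h) (by omega)
        · by_cases hm : u ∈ tl <;> simp [hm] at h
          omega
      rw [ih (k + 1) _ (by omega) (by omega)
        (fun v hv hd => hinj v (by rw [List.flatten_cons]; exact List.mem_append_right _ hv) hd)
        hb2, hval, List.append_assoc]
      rfl

theorem pv_new_inner_tid (D : PySem.Dict String Int) (M : PySem.Dict String (List Int))
    (u : String) (x : Int) (hux : D.getD u 0 = x) :
    ∀ (tl : List String) (g : PySem.Dict Int (List Int)),
    (∀ u' ∈ tl, D.getD u' 0 = x → u' = u) →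
    g.contains x = false → u ∈ tl →
    (tl.foldl (pvNStep D M) g).getD x [] = PySem.Set.ofList (M.getD u [])
      ∧ (tl.foldl (pvNStep D M) g).contains x = true := by
  intro tl
  induction tl with
  | nil => intro g _ _ hm; simp at hm
  | cons u' tl ih =>
      intro g hinj hc hm
      simp only [List.foldl_cons]
      by_cases ht : D.getD u' 0 = x
      · have hu' : u' = u := hinj u' List.mem_cons_self ht
        subst hu'
        have e : pvNStep D M g u' = g.insert x (PySem.Set.ofList (M.getD u' [])) := by
          show (if g.contains (D.getD u' 0) then g
            else g.insert (D.getD u' 0) (PySem.Set.ofList (M.getD u' []))) = _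
          rw [ht, if_neg (by rw [hc]; simp)]
        rw [e]
        obtain ⟨h1, h2⟩ := pv_new_keep_inner D M tl x
          (g.insert x (PySem.Set.ofList (M.getD u' [])))
          (PySem.Dict.contains_insert_self g _ _)
        exact ⟨h1.trans (PySem.Dict.getD_insert_self g _ _ _), h2⟩
      · have hu' : u' ≠ u := fun heq => ht (heq ▸ hux)
        have hm' : u ∈ tl := by
          rcases List.mem_cons.mp hm with heq | h
          · exact absurd heq.symm hu'
          · exact h
        have hcs : (pvNStep D M g u').contains x = g.contains x := by
          show (if g.contains (D.getD u' 0) then g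
            else g.insert (D.getD u' 0) (PySem.Set.ofList (M.getD u' []))).contains x = _
          split
          · rfl
          · rw [PySem.Dict.contains_insert]
            simp [(show x ≠ D.getD u' 0 from fun h => ht h.symm)]
        exact ih _ (fun v hv hd => hinj v (List.mem_cons_of_mem _ hv) hd)
          (by rw [hcs, hc]) hm'

theorem pv_new_tid (D : PySem.Dict String Int) (M : PySem.Dict String (List Int)) (n : Int)
    (u : String) (x : Int) (hux : D.getD u 0 = x) (hnx : n ≤ x) (rest : List (List String)) :
    ∀ (k : Int) (g : PySem.Dict Int (List Int)),
    k + (rest.length : Int) ≤ n →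
    (∀ u' ∈ rest.flatten, D.getD u' 0 = x → u' = u) →
    g.contains x = false → u ∈ rest.flatten →
    (pvNOuter D M g k rest).getD x [] = PySem.Set.ofList (M.getD u []) := by
  induction rest with
  | nil => intro k g _ _ _ hm; simp at hm
  | cons tl rest ih =>
      intro k g hkn hinj hc hmem
      have hlc : (((tl :: rest).length : Nat) : Int) = ((rest.length : Nat) : Int) + 1 := by
        push_cast [List.length_cons]; ring
      rw [hlc] at hkn
      have hxk : x ≠ k := by omega
      show (pvNOuter D M (tl.foldl (pvNStep D M)
          (g.insert k (PySem.Set.ofList (tl.map (fun v => D.getD v 0))))) (k + 1)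
            rest).getD x [] = _
      have hc1 : (g.insert k (PySem.Set.ofList (tl.map (fun v => D.getD v 0)))).contains x
          = false := by
        rw [PySem.Dict.contains_insert, hc]
        simp [hxk]
      by_cases hm : u ∈ tl
      · obtain ⟨hv, hct⟩ := pv_new_inner_tid D M u x hux tl _
          (fun v hv hd => hinj v (by rw [List.flatten_cons]; exact List.mem_append_left _ hv) hd)
          hc1 hm
        rw [pv_new_keep D M rest (k + 1) _ x hct ?_, hv]
        intro m' _ heq
        have hm0 : (0 : Int) ≤ (m' : Int) := by positivity
        omega
      · have hfr := pv_new_frame_inner D M tl x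
          (fun v hv hd => absurd (hinj v
            (by rw [List.flatten_cons]; exact List.mem_append_left _ hv) hd ▸ hv) hm)
          (g.insert k (PySem.Set.ofList (tl.map (fun v => D.getD v 0))))
        apply ih (k + 1) _ (by omega)
          (fun v hv hd => hinj v (by rw [List.flatten_cons]; exact List.mem_append_right _ hv) hd)
          (by rw [hfr.2, hc1])
          (by
            rcases List.mem_append.mp (by rw [← List.flatten_cons]; exact hmem :
              u ∈ tl ++ rest.flatten) with h | h
            · exact absurd h hm
            · exact h)

-- ======= bridges from port B's enumerate-folds to the recursion forms =======

theorem pv_mouter_bridge (ts : List (List String)) :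
    ∀ (k : Int) (M : PySem.Dict String (List Int)),
    (PySem.List.enumerate ts k).foldl (fun M p => p.2.foldl (pvMstep p.1) M) M
      = pvMOuter M k ts := by
  induction ts with
  | nil => intro k M; rfl
  | cons tl ts ih =>
      intro k M
      simp only [PySem.List.enumerate_cons, List.foldl_cons, pvMOuter, ih]

theorem pv_nouter_bridge (D : PySem.Dict String Int) (M : PySem.Dict String (List Int))
    (ts : List (List String)) :
    ∀ (k : Int) (g : PySem.Dict Int (List Int)),
    (PySem.List.enumerate ts k).foldl
      (fun g p =>
        p.2.foldl (pvNStep D M)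
          (g.insert p.1 (PySem.Set.ofList (p.2.map (fun u => D.getD u 0))))) g
      = pvNOuter D M g k ts := by
  induction ts with
  | nil => intro k g; rfl
  | cons tl ts ih =>
      intro k g
      simp only [PySem.List.enumerate_cons, List.foldl_cons, pvNOuter, ih]

-- ======= final assembly =======

theorem pv_A_char (pl : List (List (String × List (List (String × String))))) :
    make_graph_dict pl
      = ((pvBOuter (pvAsgAll (pl.length : Int) PySem.Dict.empty (pl.map pvGetTracks))
            PySem.Dict.empty 0 (pl.map pvGetTracks)).items,
         (pvAsgAll (pl.length : Int) PySem.Dict.empty (pl.map pvGetTracks)).items,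
         (pvAsgAll (pl.length : Int) PySem.Dict.empty (pl.map pvGetTracks)).items.map
           (fun q => (q.2, q.1))) := by
  rw [pv_portA_char]
  have hsz0 : ((PySem.Dict.empty : PySem.Dict String Int).size : Int) = 0 := rfl
  have hmain := pv_outer_main
    (pvAsgAll (pl.length : Int) PySem.Dict.empty (pl.map pvGetTracks)) (pl.length : Int)
    (pl.map pvGetTracks) PySem.Dict.empty PySem.Dict.empty 0
    (le_refl 0)
    (by simp)
    (by rw [hsz0, PySem.List.pyRange_one_eq_nil (by omega)]; rfl)
    (by intro i hi; simp [PySem.Dict.empty, PySem.Dict.keys] at hi)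
    (by intro v hv; simp [PySem.Dict.empty, PySem.Dict.values] at hv)
    (by intro u v h; exact h)
  have h0 : ((PySem.Dict.empty : PySem.Dict Int (List Int)), (pl.length : Int),
        (PySem.Dict.empty : PySem.Dict String Int))
      = (PySem.Dict.empty,
         (pl.length : Int) + ((PySem.Dict.empty : PySem.Dict String Int).size : Int),
         PySem.Dict.empty) := by rw [hsz0]; norm_num
  rw [h0, hmain]
  refine Prod.ext rfl (Prod.ext rfl ?_)
  show (PySem.Dict.ofList
      ((pvAsgAll (pl.length : Int) PySem.Dict.empty (pl.map pvGetTracks)).values.zip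
        (pvAsgAll (pl.length : Int) PySem.Dict.empty (pl.map pvGetTracks)).keys)).items
    = (pvAsgAll (pl.length : Int) PySem.Dict.empty (pl.map pvGetTracks)).items.map
        (fun q => (q.2, q.1))
  have hzip : (pvAsgAll (pl.length : Int) PySem.Dict.empty (pl.map pvGetTracks)).values.zip
        (pvAsgAll (pl.length : Int) PySem.Dict.empty (pl.map pvGetTracks)).keys
      = (pvAsgAll (pl.length : Int) PySem.Dict.empty (pl.map pvGetTracks)).items.map
          (fun q => (q.2, q.1)) := by
    show ((pvAsgAll (pl.length : Int) PySem.Dict.empty (pl.map pvGetTracks)).items.map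
        (fun x => x.2)).zip
        ((pvAsgAll (pl.length : Int) PySem.Dict.empty (pl.map pvGetTracks)).items.map
          (fun x => x.1)) = _
    rw [List.zip_map']
  rw [hzip]
  apply pv_ofList_items
  have hkeys : ((pvAsgAll (pl.length : Int) PySem.Dict.empty (pl.map pvGetTracks)).items.map
        (fun q : String × Int => (q.2, q.1))).map Prod.fst
      = (pvAsgAll (pl.length : Int) PySem.Dict.empty (pl.map pvGetTracks)).values := by
    rw [List.map_map]; rfl
  rw [hkeys]
  rw [pv_asgAll_vals (pl.length : Int) (pl.map pvGetTracks) PySem.Dict.empty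
    (by rw [hsz0, PySem.List.pyRange_one_eq_nil (by omega)]; rfl)]
  exact PySem.List.nodup_pyRange_one _ _

theorem pv_B_char (pl : List (List (String × List (List (String × String))))) :
    make_graph_dict_alt pl
      = ((pvBOuter (pvAsgAll (pl.length : Int) PySem.Dict.empty (pl.map pvGetTracks))
            PySem.Dict.empty 0 (pl.map pvGetTracks)).items,
         (pvAsgAll (pl.length : Int) PySem.Dict.empty (pl.map pvGetTracks)).items,
         (pvAsgAll (pl.length : Int) PySem.Dict.empty (pl.map pvGetTracks)).items.map
           (fun q => (q.2, q.1))) := by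
  simp only [make_graph_dict_alt]
  rw [pv_mouter_bridge]
  rw [pv_nouter_bridge]
  -- abbreviations (all definitionally transparent)
  have hlsn : (((pl.map pvGetTracks).length : Nat) : Int) = (pl.length : Int) := by
    rw [List.length_map]
  have hMkeys : (pvMOuter PySem.Dict.empty 0 (pl.map pvGetTracks)).keys
      = PySem.Set.ofList (pl.map pvGetTracks).flatten := by
    rw [pv_mouter_keys, PySem.Dict.keys_empty]
    rfl
  have hMget : ∀ u, (pvMOuter PySem.Dict.empty 0 (pl.map pvGetTracks)).getD u []
      = pvMems 0 (pl.map pvGetTracks) u := by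
    intro u
    rw [pv_mouter_getD u (pl.map pvGetTracks) 0 PySem.Dict.empty
      (by rw [PySem.Dict.getD_empty]; intro x hx; simp at hx), PySem.Dict.getD_empty]
    rfl
  -- the enumerated id list has distinct first components
  have hfst : ((PySem.List.enumerate
        (pvMOuter PySem.Dict.empty 0 (pl.map pvGetTracks)).keys 0).map
          (fun q : Int × String => ((pl.length : Int) + q.1, q.2))).map Prod.fst
      = (PySem.List.pyRange 0
          (0 + ((pvMOuter PySem.Dict.empty 0 (pl.map pvGetTracks)).keys.length : Int)) 1).map
          (fun j => (pl.length : Int) + j) := by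
    rw [List.map_map,
      show ((Prod.fst ∘ fun q : Int × String => ((pl.length : Int) + q.1, q.2)))
        = ((fun j => (pl.length : Int) + j) ∘ Prod.fst) from by funext q; rfl,
      ← List.map_map, pv_enum_fst]
  have hfstNodup : (((PySem.List.enumerate
        (pvMOuter PySem.Dict.empty 0 (pl.map pvGetTracks)).keys 0).map
          (fun q : Int × String => ((pl.length : Int) + q.1, q.2))).map Prod.fst).Nodup := by
    rw [hfst]
    exact (PySem.List.nodup_pyRange_one _ _).map (fun a b h => by omega)
  -- the comprehension dict of ids IS pass-1's tracks dict
  have hTDB : (PySem.Dict.ofList ((PySem.List.enumerate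
        (pvMOuter PySem.Dict.empty 0 (pl.map pvGetTracks)).keys 0).map
          (fun q : Int × String => (q.2, (pl.length : Int) + q.1))))
      = pvAsgAll (pl.length : Int) PySem.Dict.empty (pl.map pvGetTracks) := by
    apply PySem.Dict.ext
    rw [pv_ofList_items _ (by
        rw [List.map_map,
          show (Prod.fst ∘ fun q : Int × String => (q.2, (pl.length : Int) + q.1)) = Prod.snd
            from by funext q; rfl,
          pv_enum_snd, hMkeys]
        exact PySem.Set.nodup_ofList _),
      pv_TD_items, hMkeys]
  rw [show (fun q : Int × String => (q.2, (pl.length : Int) + q.1))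
      = (fun q : Int × String => (q.2, (pl.length : Int) + q.1)) from rfl] at hTDB
  rw [hTDB]
  refine Prod.ext ?_ (Prod.ext rfl ?_)
  · -- the graph dicts agree
    show (pvNOuter (pvAsgAll (pl.length : Int) PySem.Dict.empty (pl.map pvGetTracks))
        (pvMOuter PySem.Dict.empty 0 (pl.map pvGetTracks)) PySem.Dict.empty 0
        (pl.map pvGetTracks)).items = _
    have htd : ∀ u ∈ (pl.map pvGetTracks).flatten,
        (pl.length : Int) ≤ (pvAsgAll (pl.length : Int) PySem.Dict.empty
          (pl.map pvGetTracks)).getD u 0 := by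
      intro u hu
      obtain ⟨i, hi, _, hd⟩ := pv_TD_shape (pl.length : Int) (pl.map pvGetTracks) u hu
      rw [hd]
      have : (0 : Int) ≤ (i : Int) := by positivity
      omega
    have hkeq := pv_keys_outer (pvAsgAll (pl.length : Int) PySem.Dict.empty (pl.map pvGetTracks))
      (pvMOuter PySem.Dict.empty 0 (pl.map pvGetTracks)) (pl.map pvGetTracks) 0
      PySem.Dict.empty PySem.Dict.empty rfl
    have hnodN := pv_nodup_keys_nouter
      (pvAsgAll (pl.length : Int) PySem.Dict.empty (pl.map pvGetTracks))
      (pvMOuter PySem.Dict.empty 0 (pl.map pvGetTracks)) (pl.map pvGetTracks) 0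
      PySem.Dict.empty (by rw [PySem.Dict.keys_empty]; exact List.nodup_nil)
    have hnodO : (pvBOuter (pvAsgAll (pl.length : Int) PySem.Dict.empty (pl.map pvGetTracks))
        PySem.Dict.empty 0 (pl.map pvGetTracks)).keys.Nodup := by rw [hkeq]; exact hnodN
    rw [PySem.Dict.items_eq_map_keys _ hnodN [], PySem.Dict.items_eq_map_keys _ hnodO [], hkeq]
    apply List.map_congr_left
    intro x hx
    have hshape := pv_keys_shape
      (pvAsgAll (pl.length : Int) PySem.Dict.empty (pl.map pvGetTracks))
      (pvMOuter PySem.Dict.empty 0 (pl.map pvGetTracks)) (pl.length : Int)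
      (pl.map pvGetTracks).flatten (pl.map pvGetTracks) 0 PySem.Dict.empty
      (le_refl 0) (by rw [hlsn]; omega) (fun u h => h)
      (by intro y hy; rw [PySem.Dict.keys_empty] at hy; simp at hy) x hx
    refine Prod.ext rfl ?_
    show (pvNOuter _ _ PySem.Dict.empty 0 (pl.map pvGetTracks)).getD x []
      = (pvBOuter _ PySem.Dict.empty 0 (pl.map pvGetTracks)).getD x []
    rcases hshape with ⟨hx0, hxn⟩ | ⟨u, hu, hux⟩
    · -- a playlist node
      have hxt : ((x.toNat : Nat) : Int) = x := Int.toNat_of_nonneg hx0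
      have hm : x.toNat < (pl.map pvGetTracks).length := by omega
      have hxx : (0 : Int) + ((x.toNat : Nat) : Int) = x := by omega
      rw [← hxx,
        pv_new_pid _ _ (pl.length : Int) (pl.map pvGetTracks) 0 PySem.Dict.empty x.toNat hm
          (le_refl 0) (by rw [hlsn]; omega) htd,
        pv_old_pid _ (pl.length : Int) (pl.map pvGetTracks) 0 PySem.Dict.empty x.toNat hm
          (le_refl 0) (by rw [hlsn]; omega) htd]
    · -- a track node
      obtain ⟨i, hi, hgi, hd⟩ := pv_TD_shape (pl.length : Int) (pl.map pvGetTracks) u hu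
      have hnx : (pl.length : Int) ≤ x := by
        rw [← hux, hd]
        have : (0 : Int) ≤ (i : Int) := by positivity
        omega
      have hinj : ∀ u' ∈ (pl.map pvGetTracks).flatten,
          (pvAsgAll (pl.length : Int) PySem.Dict.empty (pl.map pvGetTracks)).getD u' 0 = x →
          u' = u := fun u' hu' h =>
        pv_TD_inj (pl.length : Int) (pl.map pvGetTracks) u' u hu' hu (h.trans hux.symm)
      rw [pv_new_tid _ _ (pl.length : Int) u x hux hnx (pl.map pvGetTracks) 0 PySem.Dict.empty
          (by rw [hlsn]; omega) hinj (PySem.Dict.contains_empty x) hu,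
        pv_old_tid _ (pl.length : Int) u x hux hnx (pl.map pvGetTracks) 0 PySem.Dict.empty
          (le_refl 0) (by rw [hlsn]; omega) hinj
          (by rw [PySem.Dict.getD_empty]; intro e he; simp at he),
        PySem.Dict.getD_empty, hMget u,
        pv_set_fix _ (pv_mems_nodup u (pl.map pvGetTracks) 0)]
      rfl
  · -- the id → uri dict
    show (PySem.Dict.ofList ((PySem.List.enumerate
        (pvMOuter PySem.Dict.empty 0 (pl.map pvGetTracks)).keys 0).map
          (fun q : Int × String => ((pl.length : Int) + q.1, q.2)))).items = _
    rw [pv_ofList_items _ hfstNodup, pv_TD_items, List.map_map,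
      show ((fun q : String × Int => (q.2, q.1))
          ∘ fun q : Int × String => (q.2, (pl.length : Int) + q.1))
        = (fun q : Int × String => ((pl.length : Int) + q.1, q.2)) from by funext q; rfl,
      hMkeys]

-- ===== VERDICT (by name: the statement is the Claim_ definition above) =====
theorem make_graph_dict_spec : Claim_equal_make_graph_dict := by
  intro pl _ _
  show make_graph_dict pl = make_graph_dict_alt pl
  rw [pv_A_char, pv_B_char]
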